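-- pv_equiv track=rewrite | github.com/dannyvankooten/advent-of-code | 2021/25-sea-cucumber/main.py | solve
-- ===== SOURCE A (Python) =====
-- def solve(input) -> int:
--     grid = [[state for state in line] for line in input.split("\n") ]
--
--     for step in range(1, 2**16):
--         moved = 0
--
--         # move '>' cucumbers
--         new_grid = [list(row) for row in grid]
--         for y, row in enumerate(grid):
--             for x, col in enumerate(row):
--                 if col != '>':
--                     continue
--
--                 next = (x + 1) % len(row)
--                 if row[next] == '.':
--                     new_grid[y][x] = '.'
--                     new_grid[y][next] = '>'
--                     moved += 1
--
--
--         # move down cucumbers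
--         grid = [list(row) for row in new_grid]
--         for y, row in enumerate(grid):
--             for x, col in enumerate(row):
--                 if col != 'v':
--                     continue
--
--                 next = (y + 1) % len(grid)
--                 if grid[next][x] == '.':
--                     new_grid[y][x], new_grid[next][x] = new_grid[next][x], new_grid[y][x]
--                     moved += 1
--
--         if moved == 0:
--             return step
--
--         grid = new_grid
--
--     return 0
-- ===== SOURCE B (Python) =====
-- def solve(input) -> int:
--     rows = input.split("\n")
--     H = len(rows)
--     W = len(rows[0])
--     east = {(x, y) for y, r in enumerate(rows) for x, c in enumerate(r) if c == '>'}
--     south = {(x, y) for y, r in enumerate(rows) for x, c in enumerate(r) if c == 'v'}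
--     dots = {(x, y) for y, r in enumerate(rows) for x, c in enumerate(r) if c == '.'}
--     for step in range(1, 2 ** 16):
--         em = {(x, y) for (x, y) in east if ((x + 1) % W, y) in dots}
--         et = {((x + 1) % W, y) for (x, y) in em}
--         east = (east - em) | et
--         dots = (dots | em) - et
--         sm = {(x, y) for (x, y) in south if (x, (y + 1) % H) in dots}
--         st = {(x, (y + 1) % H) for (x, y) in sm}
--         south = (south - sm) | st
--         dots = (dots | sm) - st
--         if not em and not sm:
--             return step
--     return 0
-- ===== Notes on version B (the rewrite author's own statement) =====
-- stated objective: alternative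
-- what changed: Replaces A's dense double-buffered grid mutation with a sparse representation: three coordinate sets ('>', 'v', '.') plus width/height, each step computing mover sets by membership tests and updating via set algebra (union/difference), detecting the settled step by both mover sets being empty instead of a move counter over grid cells.
-- outside the precondition, e.g. on solve('.\nv>'): A returns 0, B returns 3; on solve('\n\n>'): A returns 1, B raises ZeroDivisionError; on solve('>>.\nvv\n..v'): A raises IndexError, B returns 5
import Mathlib
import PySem

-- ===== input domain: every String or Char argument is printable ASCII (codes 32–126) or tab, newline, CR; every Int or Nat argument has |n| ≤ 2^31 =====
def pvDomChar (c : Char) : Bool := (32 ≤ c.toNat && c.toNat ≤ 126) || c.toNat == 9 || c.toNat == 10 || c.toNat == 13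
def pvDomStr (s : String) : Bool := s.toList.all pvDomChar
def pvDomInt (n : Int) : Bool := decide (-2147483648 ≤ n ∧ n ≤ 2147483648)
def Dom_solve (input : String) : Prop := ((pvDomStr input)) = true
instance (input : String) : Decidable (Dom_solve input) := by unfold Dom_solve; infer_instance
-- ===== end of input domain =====

-- B trades A's dense double-buffered grid simulation for a sparse one: three coordinate sets
-- ('>', 'v', '.') updated by set algebra, stopping when both mover sets are empty
-- (objective: alternative; same asymptotic cost).

-- ===== PORT A =====
-- grid cell read/write helpers: new_grid[y][x] and new_grid[y][x] = v.
-- The '?' default is never read on inputs admitted by Pre_solve (all indices are in range there);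
-- in Python an out-of-range access raises IndexError, which Pre_solve excludes.
def pvCell (g : List (List Char)) (y x : Nat) : Char := (g.getD y []).getD x '?'
def pvSetCell (g : List (List Char)) (y x : Nat) (v : Char) : List (List Char) :=
  g.set y ((g.getD y []).set x v)

-- "col != '>': continue" guard + "row[(x+1) % len(row)] == '.'" test of A's east loop.
-- Python's (x+1) % len(row) on the nonnegative in-range x from enumerate is Nat mod here (exact).
def pvEastMove (row : List Char) (x : Nat) (c : Char) : Bool :=
  c = '>' && row.getD ((x + 1) % row.length) '?' = '.'

-- A's east loop: nested for y,row / for x,col over the OLD grid, mutating new_grid (the state),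
-- counting moves.  List.zipIdx (value, index) is Python's enumerate (indices 0..n-1, exact).
def pvEastPhase (grid : List (List Char)) : List (List Char) × Int :=
  grid.zipIdx.foldl (fun st yr =>
    yr.1.zipIdx.foldl (fun st xc =>
      if pvEastMove yr.1 xc.2 xc.1 then
        (pvSetCell (pvSetCell st.1 yr.2 xc.2 '.') yr.2 ((xc.2 + 1) % yr.1.length) '>', st.2 + 1)
      else st) st) (grid, 0)

-- "col != 'v': continue" guard + "grid[(y+1) % len(grid)][x] == '.'" test of A's south loop
-- (reads the snapshot grid, i.e. the post-east state).
def pvSouthMove (g : List (List Char)) (y x : Nat) (c : Char) : Bool :=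
  c = 'v' && pvCell g ((y + 1) % g.length) x = '.'

-- A's south loop: iterates the snapshot g (Python's `grid = [list(row) for row in new_grid]`),
-- swapping cells of the state new_grid; the Python tuple swap reads both cells before writing.
def pvSouthPhase (g : List (List Char)) (ng0 : List (List Char)) (m0 : Int) :
    List (List Char) × Int :=
  g.zipIdx.foldl (fun st yr =>
    yr.1.zipIdx.foldl (fun st xc =>
      if pvSouthMove g yr.2 xc.2 xc.1 then
        let a := pvCell st.1 ((yr.2 + 1) % g.length) xc.2
        let b := pvCell st.1 yr.2 xc.2
        (pvSetCell (pvSetCell st.1 yr.2 xc.2 a) ((yr.2 + 1) % g.length) xc.2 b, st.2 + 1)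
      else st) st) (ng0, m0)

-- "for step in range(1, 2**16): ... if moved == 0: return step ... return 0"
def pvRunA : Nat → Int → List (List Char) → Int
  | 0, _, _ => 0
  | f + 1, step, grid =>
      let e := pvEastPhase grid
      let s := pvSouthPhase e.1 e.1 e.2
      if s.2 = 0 then step else pvRunA f (step + 1) s.1

def solve (input : String) : Int :=
  pvRunA 65535 1 (PySem.Chars.splitOn input.toList ['\n'])

-- ===== PORT B =====
-- Source B's set comprehension "{(x, y) for y, r in enumerate(rows) for x, c in enumerate(r) if c == k}":
-- the list of matching coordinates, in enumeration order, fed to Set.ofList below.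
def pvPosList (rows : List (List Char)) (k : Char) : List (Nat × Nat) :=
  rows.zipIdx.flatMap (fun ry =>
    ry.1.zipIdx.filterMap (fun cx => if cx.1 = k then some (cx.2, ry.2) else none))

-- Source B's step loop: per phase, the mover set (membership tests against dots), the target set,
-- then set-algebra updates east/south/dots; stop when both mover sets are empty.
-- Sets are PySem.Set; the comprehensions over sets build sets, so the result is order-independent.
def pvRunB : Nat → Int → Nat → Nat → PySem.Set (Nat × Nat) → PySem.Set (Nat × Nat) →
    PySem.Set (Nat × Nat) → Int
  | 0, _, _, _, _, _, _ => 0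
  | f + 1, step, W, H, east, south, dots =>
      let em := PySem.Set.ofList (east.filter (fun p => PySem.Set.contains dots ((p.1 + 1) % W, p.2)))
      let et := PySem.Set.ofList (em.map (fun p => ((p.1 + 1) % W, p.2)))
      let east' := PySem.Set.union (PySem.Set.diff east em) et
      let dots' := PySem.Set.diff (PySem.Set.union dots em) et
      let sm := PySem.Set.ofList (south.filter (fun p => PySem.Set.contains dots' (p.1, (p.2 + 1) % H)))
      let st := PySem.Set.ofList (sm.map (fun p => (p.1, (p.2 + 1) % H)))
      let south' := PySem.Set.union (PySem.Set.diff south sm) st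
      let dots'' := PySem.Set.diff (PySem.Set.union dots' sm) st
      if em = [] ∧ sm = [] then step else pvRunB f (step + 1) W H east' south' dots''

-- "rows = input.split('\n'); H = len(rows); W = len(rows[0])": split never returns an
-- empty list, so rows[0] never raises; headI is exact here.
def solve_alt (input : String) : Int :=
  let rows := PySem.Chars.splitOn input.toList ['\n']
  pvRunB 65535 1 rows.headI.length rows.length
    (PySem.Set.ofList (pvPosList rows '>'))
    (PySem.Set.ofList (pvPosList rows 'v'))
    (PySem.Set.ofList (pvPosList rows '.'))

-- ===== PRECONDITION & SPEC =====
-- Pre_solve excludes ragged inputs (lines of unequal length): there A's read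
-- grid[(y+1) % len(grid)][x] can raise IndexError, and where A does return, the value of a
-- ragged torus wrap is anybody's corner (B uses the first line's width and may return a
-- different value or raise); nothing is claimed there.
def Pre_solve (input : String) : Prop :=
  ∀ r ∈ PySem.Chars.splitOn input.toList ['\n'],
    r.length = (PySem.Chars.splitOn input.toList ['\n']).headI.length

instance (input : String) : Decidable (Pre_solve input) := by unfold Pre_solve; infer_instance

def pvWitness_solve : String := "v.\n.>"

def Spec_solve (input : String) (out : Int) : Prop := out = solve_alt input
instance (input : String) (out : Int) : Decidable (Spec_solve input out) := by
  unfold Spec_solve; infer_instance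

-- ===== CLAIM (what is proved, stated in full; the proofs are below) =====
def Claim_equal_solve : Prop :=
  ∀ (input : String), Dom_solve input → Pre_solve input → Spec_solve input (solve input)

-- ===== LEMMAS AND PROOFS =====

-- every row of g has length W
def pvRect (g : List (List Char)) (W : Nat) : Prop := ∀ r ∈ g, r.length = W

-- the pure value of A's east phase, one row at a time (proof-side model of both programs)
def pvESrc (row : List Char) (j : Nat) : Bool := pvEastMove row j (row.getD j '?')

def pvSSrc (g : List (List Char)) (y x : Nat) : Bool := pvSouthMove g y x (pvCell g y x)

def pvEastRow (row : List Char) : List Char :=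
  row.zipIdx.map (fun cx =>
    if pvESrc row cx.2 then '.'
    else if pvESrc row ((cx.2 + row.length - 1) % row.length) then '>'
    else cx.1)

def pvEast (g : List (List Char)) : List (List Char) := g.map pvEastRow

def pvSouth (g : List (List Char)) : List (List Char) :=
  g.zipIdx.map (fun ry =>
    ry.1.zipIdx.map (fun cx =>
      if cx.1 = 'v' ∧ pvCell g ((ry.2 + 1) % g.length) cx.2 = '.' then '.'
      else if cx.1 = '.' ∧ pvCell g ((ry.2 + g.length - 1) % g.length) cx.2 = 'v' then 'v'
      else cx.1))

-- partially-updated row during A's east loop: cells before k already moved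
def pvEPart (row : List Char) (k j : Nat) : Char :=
  if pvESrc row j ∧ j < k then '.'
  else if pvESrc row ((j + row.length - 1) % row.length) ∧ (j + row.length - 1) % row.length < k
    then '>'
  else row.getD j '?'

-- partially-updated grid during A's south loop: cells (i,j) with i < y, or i = y and j < k, processed
def pvSPart (g : List (List Char)) (y k i j : Nat) : Char :=
  if pvSSrc g i j ∧ (i < y ∨ (i = y ∧ j < k)) then '.'
  else if pvSSrc g ((i + g.length - 1) % g.length) j ∧
      ((i + g.length - 1) % g.length < y ∨ ((i + g.length - 1) % g.length = y ∧ j < k)) then 'v'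
  else pvCell g i j

def pvSPartGrid (g : List (List Char)) (y k : Nat) : List (List Char) :=
  g.zipIdx.map (fun ry => ry.1.zipIdx.map (fun cx => pvSPart g y k ry.2 cx.2))

-- position predicate abstracted by B's sets
def pvPos (g : List (List Char)) (c : Char) (p : Nat × Nat) : Prop :=
  p.2 < g.length ∧ p.1 < (g.getD p.2 []).length ∧ pvCell g p.2 p.1 = c

-- the set invariant tying B's three sets to A's grid
def pvInv (g : List (List Char)) (E S D : PySem.Set (Nat × Nat)) : Prop :=
  E.Nodup ∧ S.Nodup ∧ D.Nodup ∧
  (∀ p, p ∈ E ↔ pvPos g '>' p) ∧ (∀ p, p ∈ S ↔ pvPos g 'v' p) ∧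
  (∀ p, p ∈ D ↔ pvPos g '.' p)


-- ---- basic cell/shape lemmas ----

lemma pvRowLen (g : List (List Char)) (W : Nat) (hrect : pvRect g W) {y : Nat}
    (hy : y < g.length) : (g.getD y []).length = W := by
  rw [List.getD_eq_getElem _ _ hy]; exact hrect _ (List.getElem_mem _)

lemma pvSetCell_length (g : List (List Char)) (y x : Nat) (v : Char) :
    (pvSetCell g y x v).length = g.length := by
  simp [pvSetCell]

lemma pvSetCell_row_length (g : List (List Char)) (y x : Nat) (v : Char) (i : Nat) :
    ((pvSetCell g y x v).getD i []).length = (g.getD i []).length := by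
  simp only [pvSetCell, List.getD_eq_getElem?_getD, List.getElem?_set]
  by_cases h : y = i
  · subst h
    by_cases hy : y < g.length
    · simp [hy]
    · simp [hy]
  · simp [h]

lemma pvCell_setCell (g : List (List Char)) (y x : Nat) (v : Char) (i j : Nat)
    (hy : y < g.length) (hx : x < (g.getD y []).length) :
    pvCell (pvSetCell g y x v) i j = if i = y ∧ j = x then v else pvCell g i j := by
  have hx' : x < (g[y]?.getD []).length := by
    simpa [List.getD_eq_getElem?_getD] using hx
  by_cases hi : i = y
  · subst hi
    by_cases hj : j = x
    · subst hj
      have hx'' : j < g[i].length := by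
        simpa [List.getElem?_eq_getElem hy] using hx'
      simp [pvCell, pvSetCell, List.getD_eq_getElem?_getD, List.getElem?_set, hy, hx'',
        List.getElem?_eq_getElem hy]
    · have hj' : ¬ x = j := fun h => hj h.symm
      simp [pvCell, pvSetCell, List.getD_eq_getElem?_getD, List.getElem?_set, hy, hj, hj']
  · have hi' : ¬ y = i := fun h => hi h.symm
    simp [pvCell, pvSetCell, List.getD_eq_getElem?_getD, List.getElem?_set, hi, hi']

-- ---- mod helpers ----

lemma pvNext_char (H y : Nat) (hy : y < H) :
    (y + 1) % H = if y + 1 = H then 0 else y + 1 := by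
  split_ifs with h
  · simp [h]
  · exact Nat.mod_eq_of_lt (by omega)

lemma pvPrev_char (H j : Nat) (hj : j < H) :
    (j + H - 1) % H = if j = 0 then H - 1 else j - 1 := by
  split_ifs with h
  · subst h
    have : 0 + H - 1 = H - 1 := by omega
    rw [this]; exact Nat.mod_eq_of_lt (by omega)
  · have : j + H - 1 = (j - 1) + H := by omega
    rw [this, Nat.add_mod_right]
    exact Nat.mod_eq_of_lt (by omega)

lemma pvPrev_next (H y : Nat) (hy : y < H) : ((y + 1) % H + H - 1) % H = y := by
  rw [pvNext_char H y hy]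
  split_ifs with h
  · rw [pvPrev_char H 0 (by omega)]; simp; omega
  · rw [pvPrev_char H (y + 1) (by omega)]; simp

lemma pvNext_prev (H j : Nat) (hj : j < H) : ((j + H - 1) % H + 1) % H = j := by
  rw [pvPrev_char H j hj]
  split_ifs with h
  · subst h; simp [Nat.sub_add_cancel (by omega : 1 ≤ H)]
  · rw [pvNext_char H (j - 1) (by omega)]
    split_ifs with h2 <;> omega

lemma pvPrev_eq_iff (H y j : Nat) (hy : y < H) (hj : j < H) :
    (j + H - 1) % H = y ↔ j = (y + 1) % H := by
  constructor
  · intro h; rw [← h, pvNext_prev H j hj]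
  · intro h; rw [h, pvPrev_next H y hy]


-- ---- east phase: row-level fold ----

-- the inner loop body of A's east phase, restricted to the row it actually touches
def pvEStep (row : List Char) (st : List Char × Int) (xc : Char × Nat) : List Char × Int :=
  if pvEastMove row xc.2 xc.1 then
    ((st.1.set xc.2 '.').set ((xc.2 + 1) % row.length) '>', st.2 + 1)
  else st

lemma pvESrc_iff (row : List Char) (j : Nat) (hj : j < row.length) :
    pvESrc row j = true ↔ (row[j] = '>' ∧ row.getD ((j + 1) % row.length) '?' = '.') := by
  simp only [pvESrc, pvEastMove, Bool.and_eq_true, decide_eq_true_eq,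
    List.getD_eq_getElem?_getD, List.getElem?_eq_getElem hj, Option.getD_some]

lemma pvESrc_prev_iff (row : List Char) (j : Nat) (hj : j < row.length) :
    pvESrc row ((j + row.length - 1) % row.length) = true ↔
      (row[j] = '.' ∧ row.getD ((j + row.length - 1) % row.length) '?' = '>') := by
  simp only [pvESrc, pvEastMove, Bool.and_eq_true, decide_eq_true_eq,
    pvNext_prev row.length j hj, List.getD_eq_getElem?_getD,
    List.getElem?_eq_getElem hj, Option.getD_some]
  tauto

lemma pvEastRow_length (row : List Char) : (pvEastRow row).length = row.length := by
  simp [pvEastRow]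

lemma pvEastRow_getD (row : List Char) (j : Nat) (hj : j < row.length) :
    (pvEastRow row).getD j '?' =
      if pvESrc row j then '.'
      else if pvESrc row ((j + row.length - 1) % row.length) then '>'
      else row.getD j '?' := by
  have hj' : j < (pvEastRow row).length := by rw [pvEastRow_length]; exact hj
  rw [List.getD_eq_getElem _ _ hj']
  simp only [pvEastRow, List.getElem_map, List.getElem_zipIdx, Nat.zero_add]
  by_cases h1 : pvESrc row j = true
  · rw [if_pos h1, if_pos h1]
  · rw [if_neg h1, if_neg h1]
    by_cases h2 : pvESrc row ((j + row.length - 1) % row.length) = true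
    · rw [if_pos h2, if_pos h2]
    · rw [if_neg h2, if_neg h2, List.getD_eq_getElem _ _ hj]

lemma pvEPart_full (row : List Char) (k j : Nat) (hk : row.length ≤ k) (hj : j < row.length) :
    pvEPart row k j = (pvEastRow row).getD j '?' := by
  have hprev : (j + row.length - 1) % row.length < row.length := Nat.mod_lt _ (by omega)
  rw [pvEastRow_getD row j hj]
  simp [pvEPart, (by omega : j < k), (by omega : (j + row.length - 1) % row.length < k)]

lemma eastRow_fold (row : List Char) : ∀ (l : List Char) (k : Nat) (acc : List Char) (m : Int),
    row.drop k = l → acc.length = row.length →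
    (∀ j, j < row.length → acc.getD j '?' = pvEPart row k j) →
    (l.zipIdx k).foldl (pvEStep row) (acc, m)
      = (pvEastRow row,
         m + (((l.zipIdx k).countP (fun cx => pvEastMove row cx.2 cx.1) : Nat) : Int)) := by
  intro l
  induction l with
  | nil =>
    intro k acc m hdrop hlen hinv
    have hk : row.length ≤ k := by
      have := congrArg List.length hdrop
      simp only [List.length_drop, List.length_nil] at this
      omega
    simp only [List.zipIdx_nil, List.foldl_nil, List.countP_nil, Nat.cast_zero, add_zero]
    have hacc : acc = pvEastRow row := by
      apply List.ext_getElem (by rw [hlen, pvEastRow_length])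
      intro j h1 h2
      have hj : j < row.length := by omega
      rw [← List.getD_eq_getElem acc '?' h1, ← List.getD_eq_getElem (pvEastRow row) '?' h2,
        hinv j hj, pvEPart_full row k j hk hj]
    rw [hacc]
  | cons c l' ih =>
    intro k acc m hdrop hlen hinv
    have hk : k < row.length := by
      by_contra h
      rw [List.drop_eq_nil_of_le (by omega)] at hdrop
      exact (List.cons_ne_nil c l') hdrop.symm
    have hspl := List.drop_eq_getElem_cons hk
    rw [hdrop] at hspl
    have hc : c = row[k] := (List.cons_eq_cons.mp hspl).1
    have hl' : row.drop (k + 1) = l' := ((List.cons_eq_cons.mp hspl).2).symm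
    have hW : 0 < row.length := by omega
    rw [List.zipIdx_cons, List.foldl_cons, List.countP_cons]
    have hpred : pvEastMove row (c, k).2 (c, k).1 = pvESrc row k := by
      simp [pvESrc, hc, List.getD_eq_getElem?_getD, List.getElem?_eq_getElem hk]
    by_cases hsrc : pvESrc row k = true
    · -- a move happens at column k
      have hgk : row.getD k '?' = '>' := by
        have := ((pvESrc_iff row k hk).mp hsrc).1
        rw [List.getD_eq_getElem _ _ hk]; exact this
      have hgn : row.getD ((k + 1) % row.length) '?' = '.' :=
        ((pvESrc_iff row k hk).mp hsrc).2
      have hW2 : 2 ≤ row.length := by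
        rcases Nat.lt_or_ge row.length 2 with h | h
        · exfalso
          have h1 : row.length = 1 := by omega
          have hk0 : k = 0 := by omega
          rw [hk0, h1] at hgn
          rw [hk0] at hgk
          norm_num at hgn
          exact absurd (hgn.symm.trans hgk) (by decide)
        · exact h
      have hnxtlt : (k + 1) % row.length < row.length := Nat.mod_lt _ (by omega)
      have hnxtchar : (k + 1) % row.length = if k + 1 = row.length then 0 else k + 1 :=
        pvNext_char row.length k hk
      have hnxtne : (k + 1) % row.length ≠ k := by
        rw [hnxtchar]; split_ifs with h <;> omega
      have hprevnxt : ((k + 1) % row.length + row.length - 1) % row.length = k :=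
        pvPrev_next row.length k hk
      have hstep : pvEStep row (acc, m) (c, k)
          = ((acc.set k '.').set ((k + 1) % row.length) '>', m + 1) := by
        simp [pvEStep, hpred, hsrc]
      rw [hstep, if_pos (by rw [hpred]; exact hsrc)]
      have hlen' : ((acc.set k '.').set ((k + 1) % row.length) '>').length = row.length := by
        simp [hlen]
      have hgetD : ∀ j,
          ((acc.set k '.').set ((k + 1) % row.length) '>').getD j '?' =
            if j = (k + 1) % row.length then '>' else if j = k then '.' else acc.getD j '?' := by
        intro j
        simp only [List.getD_eq_getElem?_getD, List.getElem?_set, List.length_set, hlen]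
        by_cases h1 : j = (k + 1) % row.length
        · subst h1
          simp [hnxtlt]
        · have h1' : ¬ (k + 1) % row.length = j := fun h => h1 h.symm
          rw [if_neg h1', if_neg h1]
          by_cases h2 : j = k
          · subst h2
            simp [hk]
          · have h2' : ¬ k = j := fun h => h2 h.symm
            rw [if_neg h2', if_neg h2]
      have hinv' : ∀ j, j < row.length →
          ((acc.set k '.').set ((k + 1) % row.length) '>').getD j '?' = pvEPart row (k + 1) j := by
        intro j hj
        rw [hgetD j]
        by_cases hjn : j = (k + 1) % row.length
        · subst hjn
          rw [if_pos rfl]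
          unfold pvEPart
          rw [if_neg ?_, hprevnxt, if_pos ⟨hsrc, by omega⟩]
          rintro ⟨hs, hlt⟩
          by_cases hend : k + 1 = row.length
          · rw [if_pos hend] at hnxtchar
            rw [hnxtchar] at hs hgn
            have h0 : row.getD 0 '?' = '>' := by
              simp only [pvESrc, pvEastMove, Bool.and_eq_true, decide_eq_true_eq] at hs
              exact hs.1
            exact absurd (hgn.symm.trans h0) (by decide)
          · rw [if_neg hend] at hnxtchar
            omega
        · rw [if_neg hjn]
          by_cases hjk : j = k
          · subst hjk
            rw [if_pos rfl]
            unfold pvEPart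
            rw [if_pos ⟨hsrc, by omega⟩]
          · rw [if_neg hjk, hinv j hj]
            unfold pvEPart
            have e1 : (pvESrc row j = true ∧ j < k) ↔ (pvESrc row j = true ∧ j < k + 1) := by
              constructor
              · rintro ⟨a, b⟩; exact ⟨a, by omega⟩
              · rintro ⟨a, b⟩; exact ⟨a, by omega⟩
            have e2 : (pvESrc row ((j + row.length - 1) % row.length) = true ∧
                  (j + row.length - 1) % row.length < k) ↔
                (pvESrc row ((j + row.length - 1) % row.length) = true ∧
                  (j + row.length - 1) % row.length < k + 1) := by
              constructor
              · rintro ⟨a, b⟩; exact ⟨a, by omega⟩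
              · rintro ⟨a, b⟩
                refine ⟨a, ?_⟩
                rcases Nat.lt_or_ge ((j + row.length - 1) % row.length) k with h | h
                · exact h
                · exfalso
                  have heq : (j + row.length - 1) % row.length = k := by omega
                  rw [pvPrev_eq_iff row.length k j hk hj] at heq
                  exact hjn heq
            rw [if_congr e1 rfl (if_congr e2 rfl rfl)]
      rw [ih (k + 1) ((acc.set k '.').set ((k + 1) % row.length) '>') (m + 1) hl' hlen' hinv']
      have hcnt : (((l'.zipIdx (k + 1)).countP (fun cx => pvEastMove row cx.2 cx.1) + 1 : Nat) : Int)
          = (((l'.zipIdx (k + 1)).countP (fun cx => pvEastMove row cx.2 cx.1) : Nat) : Int) + 1 := by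
        push_cast; ring
      rw [hcnt]
      rw [Prod.mk.injEq]
      exact ⟨rfl, by ring⟩
    · -- no move at column k
      have hstep : pvEStep row (acc, m) (c, k) = (acc, m) := by
        simp [pvEStep, hpred, hsrc]
      rw [hstep, if_neg (by rw [hpred]; exact hsrc)]
      simp only [add_zero]
      apply ih (k + 1) acc m hl' hlen
      intro j hj
      rw [hinv j hj]
      unfold pvEPart
      have e1 : (pvESrc row j = true ∧ j < k) ↔ (pvESrc row j = true ∧ j < k + 1) := by
        constructor
        · rintro ⟨a, b⟩; exact ⟨a, by omega⟩
        · rintro ⟨a, b⟩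
          refine ⟨a, ?_⟩
          rcases Nat.lt_or_ge j k with h | h
          · exact h
          · exfalso
            have hjk : j = k := by omega
            rw [hjk] at a
            exact hsrc a
      have e2 : (pvESrc row ((j + row.length - 1) % row.length) = true ∧
            (j + row.length - 1) % row.length < k) ↔
          (pvESrc row ((j + row.length - 1) % row.length) = true ∧
            (j + row.length - 1) % row.length < k + 1) := by
        constructor
        · rintro ⟨a, b⟩; exact ⟨a, by omega⟩
        · rintro ⟨a, b⟩
          refine ⟨a, ?_⟩
          rcases Nat.lt_or_ge ((j + row.length - 1) % row.length) k with h | h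
          · exact h
          · exfalso
            have : (j + row.length - 1) % row.length = k := by omega
            rw [this] at a; exact hsrc a
      rw [if_congr e1 rfl (if_congr e2 rfl rfl)]


-- ---- east phase: lifting the row fold to the grid state ----

lemma pvGetD_set_self (G : List (List Char)) (y : Nat) (r : List Char) (hy : y < G.length) :
    (G.set y r).getD y [] = r := by
  rw [List.getD_eq_getElem?_getD, List.getElem?_set, if_pos rfl, if_pos hy, Option.getD_some]

lemma eastLift (row : List Char) (y : Nat) :
    ∀ (pairs : List (Char × Nat)) (G : List (List Char)) (m : Int), y < G.length →
    pairs.foldl (fun st xc =>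
        if pvEastMove row xc.2 xc.1 then
          (pvSetCell (pvSetCell st.1 y xc.2 '.') y ((xc.2 + 1) % row.length) '>', st.2 + 1)
        else st) (G, m)
      = (G.set y (pairs.foldl (pvEStep row) (G.getD y [], m)).1,
         (pairs.foldl (pvEStep row) (G.getD y [], m)).2) := by
  intro pairs
  induction pairs with
  | nil =>
    intro G m hy
    simp only [List.foldl_nil]
    rw [List.getD_eq_getElem _ _ hy, List.set_getElem_self hy]
  | cons xc ps ih =>
    intro G m hy
    rw [List.foldl_cons, List.foldl_cons]
    by_cases hp : pvEastMove row xc.2 xc.1 = true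
    · have hrow : (pvSetCell (pvSetCell G y xc.2 '.') y ((xc.2 + 1) % row.length) '>')
          = G.set y (((G.getD y []).set xc.2 '.').set ((xc.2 + 1) % row.length) '>') := by
        simp only [pvSetCell]
        rw [pvGetD_set_self G y _ hy, List.set_set]
      rw [if_pos hp, hrow]
      have hstep : pvEStep row (G.getD y [], m) xc
          = (((G.getD y []).set xc.2 '.').set ((xc.2 + 1) % row.length) '>', m + 1) := by
        simp [pvEStep, hp]
      rw [hstep]
      have hy' : y < (G.set y (((G.getD y []).set xc.2 '.').set ((xc.2 + 1) % row.length) '>')).length := by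
        simp [hy]
      rw [ih _ (m + 1) hy']
      rw [pvGetD_set_self G y _ hy, List.set_set]
    · rw [if_neg hp]
      have hstep : pvEStep row (G.getD y [], m) xc = (G.getD y [], m) := by
        simp [pvEStep, hp]
      rw [hstep]
      exact ih G m hy


-- ---- east phase: whole grid ----

def pvCntE (g : List (List Char)) : Int :=
  (g.map (fun r => (((r.zipIdx.countP (fun cx => pvEastMove r cx.2 cx.1)) : Nat) : Int))).sum

lemma pvEPart_zero (row : List Char) (j : Nat) : pvEPart row 0 j = row.getD j '?' := by
  simp [pvEPart]

lemma eastPhase_fold (g : List (List Char)) :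
    ∀ (l : List (List Char)) (y : Nat) (acc : List (List Char)) (m : Int),
    g.drop y = l → acc.length = g.length →
    (∀ i, i < g.length →
      acc.getD i [] = if i < y then pvEastRow (g.getD i []) else g.getD i []) →
    (l.zipIdx y).foldl (fun st yr =>
        yr.1.zipIdx.foldl (fun st xc =>
          if pvEastMove yr.1 xc.2 xc.1 then
            (pvSetCell (pvSetCell st.1 yr.2 xc.2 '.') yr.2 ((xc.2 + 1) % yr.1.length) '>',
             st.2 + 1)
          else st) st) (acc, m)
      = (g.map pvEastRow,
         m + (l.map (fun r =>
            (((r.zipIdx.countP (fun cx => pvEastMove r cx.2 cx.1)) : Nat) : Int))).sum) := by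
  intro l
  induction l with
  | nil =>
    intro y acc m hdrop hlen hinv
    have hy : g.length ≤ y := by
      have := congrArg List.length hdrop
      simp only [List.length_drop, List.length_nil] at this
      omega
    simp only [List.zipIdx_nil, List.foldl_nil, List.map_nil, List.sum_nil, add_zero]
    have hacc : acc = g.map pvEastRow := by
      apply List.ext_getElem (by simp [hlen])
      intro i h1 h2
      have hi : i < g.length := by omega
      rw [← List.getD_eq_getElem acc [] h1, hinv i hi, if_pos (by omega), List.getElem_map,
        List.getD_eq_getElem g [] hi]
    rw [hacc]
  | cons r l' ih =>
    intro y acc m hdrop hlen hinv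
    have hy : y < g.length := by
      by_contra h
      rw [List.drop_eq_nil_of_le (by omega)] at hdrop
      exact (List.cons_ne_nil r l') hdrop.symm
    have hspl := List.drop_eq_getElem_cons hy
    rw [hdrop] at hspl
    have hr : r = g[y] := (List.cons_eq_cons.mp hspl).1
    have hl' : g.drop (y + 1) = l' := ((List.cons_eq_cons.mp hspl).2).symm
    rw [List.zipIdx_cons, List.foldl_cons]
    have hy' : y < acc.length := by omega
    rw [eastLift r y r.zipIdx acc m hy']
    have haccy : acc.getD y [] = r := by
      rw [hinv y hy, if_neg (by omega), List.getD_eq_getElem g [] hy, ← hr]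
    rw [haccy]
    rw [eastRow_fold r r 0 r m (by simp) rfl (fun j _ => (pvEPart_zero r j).symm)]
    rw [ih (y + 1) (acc.set y (pvEastRow r)) _ hl' (by simp [hlen]) ?_]
    · rw [List.map_cons, List.sum_cons, Prod.mk.injEq]
      exact ⟨rfl, by push_cast; ring⟩
    · intro i hi
      by_cases hiy : i = y
      · subst hiy
        rw [pvGetD_set_self acc i _ hy', if_pos (by omega), List.getD_eq_getElem g [] hi, ← hr]
      · have : (acc.set y (pvEastRow r)).getD i [] = acc.getD i [] := by
          rw [List.getD_eq_getElem?_getD, List.getElem?_set,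
            if_neg (fun h => hiy h.symm), ← List.getD_eq_getElem?_getD]
        rw [this, hinv i hi]
        by_cases h2 : i < y
        · rw [if_pos h2, if_pos (by omega)]
        · rw [if_neg h2, if_neg (by omega)]

lemma eastPhase_eq (g : List (List Char)) : pvEastPhase g = (g.map pvEastRow, pvCntE g) := by
  unfold pvEastPhase
  rw [eastPhase_fold g g 0 g 0 rfl rfl (fun i _ => by rw [if_neg (by omega)])]
  rw [pvCntE, zero_add]


-- ---- south phase: canonical partial grid ----

def pvCntS (g : List (List Char)) : Int :=
  (g.zipIdx.map (fun ry =>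
    (((ry.1.zipIdx.countP (fun cx => pvSouthMove g ry.2 cx.2 cx.1)) : Nat) : Int))).sum

lemma pvSPartGrid_length (g : List (List Char)) (y k : Nat) :
    (pvSPartGrid g y k).length = g.length := by
  simp [pvSPartGrid]

lemma pvSPartGrid_row (g : List (List Char)) (y k i : Nat) (hi : i < g.length) :
    (pvSPartGrid g y k).getD i [] = (g[i].zipIdx.map (fun cx => pvSPart g y k i cx.2)) := by
  have hi' : i < (pvSPartGrid g y k).length := by rw [pvSPartGrid_length]; exact hi
  rw [List.getD_eq_getElem _ _ hi']
  simp [pvSPartGrid, List.getElem_map, List.getElem_zipIdx]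

lemma pvSPartGrid_row_length (g : List (List Char)) (y k i : Nat) (hi : i < g.length) :
    ((pvSPartGrid g y k).getD i []).length = (g.getD i []).length := by
  rw [pvSPartGrid_row g y k i hi, List.getD_eq_getElem _ _ hi]
  simp

lemma pvSPartGrid_cell (g : List (List Char)) (y k i j : Nat) (hi : i < g.length)
    (hj : j < (g.getD i []).length) :
    pvCell (pvSPartGrid g y k) i j = pvSPart g y k i j := by
  have hj' : j < g[i].length := by rwa [List.getD_eq_getElem _ _ hi] at hj
  rw [pvCell, pvSPartGrid_row g y k i hi]
  have hj'' : j < (g[i].zipIdx.map (fun cx => pvSPart g y k i cx.2)).length := by simpa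
  rw [List.getD_eq_getElem _ _ hj'']
  simp [List.getElem_map, List.getElem_zipIdx]

lemma pvSPartGrid_ext (g : List (List Char)) (W : Nat) (hrect : pvRect g W) (y k : Nat)
    (acc : List (List Char)) (hlen : acc.length = g.length)
    (hrows : ∀ i, i < g.length → (acc.getD i []).length = (g.getD i []).length)
    (hpt : ∀ i j, i < g.length → j < W → pvCell acc i j = pvSPart g y k i j) :
    acc = pvSPartGrid g y k := by
  apply List.ext_getElem (by rw [hlen, pvSPartGrid_length])
  intro i h1 h2
  have hi : i < g.length := by omega
  have hWrow : (g.getD i []).length = W := by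
    rw [List.getD_eq_getElem _ _ hi]
    exact hrect g[i] (List.getElem_mem _)
  apply List.ext_getElem
  · rw [← List.getD_eq_getElem acc [] h1, ← List.getD_eq_getElem (pvSPartGrid g y k) [] h2,
      hrows i hi, pvSPartGrid_row_length g y k i hi]
  · intro j hj1 hj2
    have hjW : j < W := by
      rw [← List.getD_eq_getElem acc [] h1] at hj1
      rw [hrows i hi, hWrow] at hj1
      exact hj1
    have e1 : acc[i][j] = pvCell acc i j := by
      rw [pvCell, List.getD_eq_getElem acc [] h1, List.getD_eq_getElem _ _ hj1]
    have e2 : (pvSPartGrid g y k)[i][j] = pvCell (pvSPartGrid g y k) i j := by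
      rw [pvCell, List.getD_eq_getElem (pvSPartGrid g y k) [] h2, List.getD_eq_getElem _ _ hj2]
    rw [e1, e2, hpt i j hi hjW, pvSPartGrid_cell g y k i j hi (by omega)]

lemma pvSPart_row_done (g : List (List Char)) (W : Nat) (hrect : pvRect g W) (y k : Nat)
    (hk : W ≤ k) : pvSPartGrid g y k = pvSPartGrid g (y + 1) 0 := by
  apply pvSPartGrid_ext g W hrect _ _ _ (pvSPartGrid_length g y k)
    (fun i hi => pvSPartGrid_row_length g y k i hi)
  intro i j hi hj
  rw [pvSPartGrid_cell g y k i j hi (by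
    rw [List.getD_eq_getElem _ _ hi]; rw [hrect g[i] (List.getElem_mem _)]; exact hj)]
  unfold pvSPart
  have e1 : (pvSSrc g i j = true ∧ (i < y ∨ (i = y ∧ j < k))) ↔
      (pvSSrc g i j = true ∧ (i < y + 1 ∨ (i = y + 1 ∧ j < 0))) := by
    constructor
    · rintro ⟨a, b⟩; exact ⟨a, by omega⟩
    · rintro ⟨a, b⟩; exact ⟨a, by omega⟩
  have e2 : (pvSSrc g ((i + g.length - 1) % g.length) j = true ∧
        ((i + g.length - 1) % g.length < y ∨ ((i + g.length - 1) % g.length = y ∧ j < k))) ↔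
      (pvSSrc g ((i + g.length - 1) % g.length) j = true ∧
        ((i + g.length - 1) % g.length < y + 1 ∨
          ((i + g.length - 1) % g.length = y + 1 ∧ j < 0))) := by
    constructor
    · rintro ⟨a, b⟩; exact ⟨a, by omega⟩
    · rintro ⟨a, b⟩; exact ⟨a, by omega⟩
  rw [if_congr e1 rfl (if_congr e2 rfl rfl)]


-- ---- south phase: the fold over cells ----

-- the loop body of A's south phase (named for the proofs; definitionally the lambda in pvSouthPhase)
def pvSBody (g : List (List Char)) (y : Nat) :
    (List (List Char) × Int) → (Char × Nat) → (List (List Char) × Int) :=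
  fun st xc =>
    if pvSouthMove g y xc.2 xc.1 then
      let a := pvCell st.1 ((y + 1) % g.length) xc.2
      let b := pvCell st.1 y xc.2
      (pvSetCell (pvSetCell st.1 y xc.2 a) ((y + 1) % g.length) xc.2 b, st.2 + 1)
    else st

lemma pvSouthPhase_eq_body (g ng0 : List (List Char)) (m0 : Int) :
    pvSouthPhase g ng0 m0
      = g.zipIdx.foldl (fun st yr => yr.1.zipIdx.foldl (pvSBody g yr.2) st) (ng0, m0) := rfl

lemma pvSSrc_iff' (g : List (List Char)) (i j : Nat) :
    pvSSrc g i j = true ↔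
      (pvCell g i j = 'v' ∧ pvCell g ((i + 1) % g.length) j = '.') := by
  simp [pvSSrc, pvSouthMove]

lemma southRow_fold (g : List (List Char)) (W : Nat) (hrect : pvRect g W) (y : Nat)
    (hy : y < g.length) :
    ∀ (l : List Char) (k : Nat) (acc : List (List Char)) (m : Int),
    (g.getD y []).drop k = l →
    acc.length = g.length →
    (∀ i, i < g.length → (acc.getD i []).length = (g.getD i []).length) →
    (∀ i j, i < g.length → j < W → pvCell acc i j = pvSPart g y k i j) →
    (l.zipIdx k).foldl (pvSBody g y) (acc, m)
      = (pvSPartGrid g (y + 1) 0,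
         m + (((l.zipIdx k).countP (fun cx => pvSouthMove g y cx.2 cx.1) : Nat) : Int)) := by
  have hrowW : (g.getD y []).length = W := by
    rw [List.getD_eq_getElem _ _ hy]; exact hrect _ (List.getElem_mem _)
  intro l
  induction l with
  | nil =>
    intro k acc m hdrop hlen hrows hinv
    have hk : W ≤ k := by
      have := congrArg List.length hdrop
      simp only [List.length_drop, List.length_nil, hrowW] at this
      omega
    simp only [List.zipIdx_nil, List.foldl_nil, List.countP_nil, Nat.cast_zero, add_zero]
    rw [pvSPartGrid_ext g W hrect y k acc hlen hrows hinv,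
      pvSPart_row_done g W hrect y k hk]
  | cons c l' ih =>
    intro k acc m hdrop hlen hrows hinv
    have hkW : k < W := by
      by_contra h
      rw [List.drop_eq_nil_of_le (by omega)] at hdrop
      exact (List.cons_ne_nil c l') hdrop.symm
    have hk : k < (g.getD y []).length := by omega
    have hspl := List.drop_eq_getElem_cons hk
    rw [hdrop] at hspl
    have hc : c = (g.getD y [])[k] := (List.cons_eq_cons.mp hspl).1
    have hl' : (g.getD y []).drop (k + 1) = l' := ((List.cons_eq_cons.mp hspl).2).symm
    have hcell : pvCell g y k = c := by
      rw [pvCell, List.getD_eq_getElem _ _ hk, hc]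
    have hpredc : pvSouthMove g y k c = pvSSrc g y k := by
      rw [pvSSrc, hcell]
    have hH : 0 < g.length := by omega
    rw [List.zipIdx_cons, List.foldl_cons, List.countP_cons]
    by_cases hsrc : pvSSrc g y k = true
    · -- a cucumber moves down from (y, k)
      obtain ⟨hv, hdot⟩ := (pvSSrc_iff' g y k).mp hsrc
      have hH2 : 2 ≤ g.length := by
        rcases Nat.lt_or_ge g.length 2 with h | h
        · exfalso
          have h1 : g.length = 1 := by omega
          have hy0 : y = 0 := by omega
          rw [hy0, h1] at hdot
          norm_num at hdot
          rw [hy0] at hv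
          exact absurd (hdot.symm.trans hv) (by decide)
        · exact h
      have hnxtlt : (y + 1) % g.length < g.length := Nat.mod_lt _ (by omega)
      have hnxtchar : (y + 1) % g.length = if y + 1 = g.length then 0 else y + 1 :=
        pvNext_char g.length y hy
      have hnxtne : (y + 1) % g.length ≠ y := by
        rw [hnxtchar]; split_ifs with h <;> omega
      have hprevnxt : ((y + 1) % g.length + g.length - 1) % g.length = y :=
        pvPrev_next g.length y hy
      -- the two reads of the Python tuple swap: the snapshot values 'v' and '.'
      have hb : pvCell acc y k = 'v' := by
        rw [hinv y k hy hkW]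
        unfold pvSPart
        rw [if_neg ?_, if_neg ?_]
        · exact hv
        · rintro ⟨hs, -⟩
          obtain ⟨h1, h2⟩ := (pvSSrc_iff' g _ k).mp hs
          rw [pvNext_prev g.length y hy] at h2
          rw [h2] at hv
          exact absurd hv (by decide)
        · rintro ⟨-, hproc⟩
          omega
      have ha : pvCell acc ((y + 1) % g.length) k = '.' := by
        rw [hinv _ k hnxtlt hkW]
        unfold pvSPart
        rw [if_neg ?_, if_neg ?_]
        · exact hdot
        · rintro ⟨hs, hproc⟩
          rw [hprevnxt] at hproc
          omega
        · rintro ⟨hs, -⟩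
          obtain ⟨h1, -⟩ := (pvSSrc_iff' g _ k).mp hs
          rw [h1] at hdot
          exact absurd hdot (by decide)
      have hstep : pvSBody g y (acc, m) (c, k)
          = (pvSetCell (pvSetCell acc y k '.') ((y + 1) % g.length) k 'v', m + 1) := by
        simp only [pvSBody, hpredc, hsrc, if_pos, ha, hb]
      rw [hstep, if_pos (by rw [hpredc]; exact hsrc)]
      -- bounds for the two writes
      have hky : k < (acc.getD y []).length := by rw [hrows y hy, hrowW]; exact hkW
      have hkn : k < ((pvSetCell acc y k '.').getD ((y + 1) % g.length) []).length := by
        rw [pvSetCell_row_length, hrows _ hnxtlt, List.getD_eq_getElem _ _ hnxtlt,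
          hrect _ (List.getElem_mem _)]
        exact hkW
      have hlen1 : (pvSetCell acc y k '.').length = g.length := by
        rw [pvSetCell_length, hlen]
      have hcell' : ∀ i j, i < g.length → j < W →
          pvCell (pvSetCell (pvSetCell acc y k '.') ((y + 1) % g.length) k 'v') i j =
            if i = (y + 1) % g.length ∧ j = k then 'v'
            else if i = y ∧ j = k then '.' else pvCell acc i j := by
        intro i j hi hj
        rw [pvCell_setCell _ _ _ _ i j (by omega) hkn,
          pvCell_setCell _ _ _ _ i j (by omega) hky]
      have hinv' : ∀ i j, i < g.length → j < W →
          pvCell (pvSetCell (pvSetCell acc y k '.') ((y + 1) % g.length) k 'v') i j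
            = pvSPart g y (k + 1) i j := by
        intro i j hi hj
        rw [hcell' i j hi hj]
        by_cases h1 : i = (y + 1) % g.length ∧ j = k
        · obtain ⟨h1a, h1b⟩ := h1
          rw [h1a, h1b, if_pos ⟨rfl, rfl⟩]
          unfold pvSPart
          rw [if_neg ?_, hprevnxt, if_pos ⟨hsrc, Or.inr ⟨rfl, by omega⟩⟩]
          rintro ⟨hs, -⟩
          obtain ⟨h1', -⟩ := (pvSSrc_iff' g _ k).mp hs
          rw [h1'] at hdot
          exact absurd hdot (by decide)
        · rw [if_neg h1]
          by_cases h2 : i = y ∧ j = k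
          · obtain ⟨h2a, h2b⟩ := h2
            rw [h2a, h2b, if_pos ⟨rfl, rfl⟩]
            unfold pvSPart
            rw [if_pos ⟨hsrc, Or.inr ⟨rfl, by omega⟩⟩]
          · rw [if_neg h2, hinv i j hi hj]
            unfold pvSPart
            have e1 : (pvSSrc g i j = true ∧ (i < y ∨ (i = y ∧ j < k))) ↔
                (pvSSrc g i j = true ∧ (i < y ∨ (i = y ∧ j < k + 1))) := by
              constructor
              · rintro ⟨a, b⟩; exact ⟨a, by omega⟩
              · rintro ⟨a, b⟩
                refine ⟨a, ?_⟩
                rcases b with h | ⟨hiy, hjk⟩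
                · exact Or.inl h
                · rcases Nat.lt_or_ge j k with h3 | h3
                  · exact Or.inr ⟨hiy, h3⟩
                  · exact absurd ⟨hiy, by omega⟩ h2
            have e2 : (pvSSrc g ((i + g.length - 1) % g.length) j = true ∧
                  ((i + g.length - 1) % g.length < y ∨
                    ((i + g.length - 1) % g.length = y ∧ j < k))) ↔
                (pvSSrc g ((i + g.length - 1) % g.length) j = true ∧
                  ((i + g.length - 1) % g.length < y ∨
                    ((i + g.length - 1) % g.length = y ∧ j < k + 1))) := by
              constructor
              · rintro ⟨a, b⟩; exact ⟨a, by omega⟩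
              · rintro ⟨a, b⟩
                refine ⟨a, ?_⟩
                rcases b with h | ⟨hprev, hjk⟩
                · exact Or.inl h
                · rcases Nat.lt_or_ge j k with h3 | h3
                  · exact Or.inr ⟨hprev, h3⟩
                  · exfalso
                    have hjk' : j = k := by omega
                    rw [pvPrev_eq_iff g.length y i hy hi] at hprev
                    exact h1 ⟨hprev, hjk'⟩
            rw [if_congr e1 rfl (if_congr e2 rfl rfl)]
      have hlen2 : (pvSetCell (pvSetCell acc y k '.') ((y + 1) % g.length) k 'v').length
          = g.length := by
        rw [pvSetCell_length, hlen1]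
      have hrows2 : ∀ i, i < g.length →
          ((pvSetCell (pvSetCell acc y k '.') ((y + 1) % g.length) k 'v').getD i []).length
            = (g.getD i []).length := by
        intro i hi
        rw [pvSetCell_row_length, pvSetCell_row_length]
        exact hrows i hi
      rw [ih (k + 1) _ (m + 1) hl' hlen2 hrows2 hinv']
      rw [Prod.mk.injEq]
      exact ⟨rfl, by push_cast; ring⟩
    · -- no move at (y, k)
      have hstep : pvSBody g y (acc, m) (c, k) = (acc, m) := by
        simp [pvSBody, hpredc, hsrc]
      rw [hstep, if_neg (by rw [hpredc]; exact hsrc)]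
      simp only [add_zero]
      apply ih (k + 1) acc m hl' hlen hrows
      intro i j hi hj
      rw [hinv i j hi hj]
      unfold pvSPart
      have e1 : (pvSSrc g i j = true ∧ (i < y ∨ (i = y ∧ j < k))) ↔
          (pvSSrc g i j = true ∧ (i < y ∨ (i = y ∧ j < k + 1))) := by
        constructor
        · rintro ⟨a, b⟩; exact ⟨a, by omega⟩
        · rintro ⟨a, b⟩
          refine ⟨a, ?_⟩
          rcases b with h | ⟨rfl, hjk⟩
          · exact Or.inl h
          · rcases Nat.lt_or_ge j k with h2 | h2
            · exact Or.inr ⟨rfl, h2⟩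
            · exfalso
              have : j = k := by omega
              rw [this] at a
              exact hsrc a
      have e2 : (pvSSrc g ((i + g.length - 1) % g.length) j = true ∧
            ((i + g.length - 1) % g.length < y ∨ ((i + g.length - 1) % g.length = y ∧ j < k))) ↔
          (pvSSrc g ((i + g.length - 1) % g.length) j = true ∧
            ((i + g.length - 1) % g.length < y ∨
              ((i + g.length - 1) % g.length = y ∧ j < k + 1))) := by
        constructor
        · rintro ⟨a, b⟩; exact ⟨a, by omega⟩
        · rintro ⟨a, b⟩
          refine ⟨a, ?_⟩
          rcases b with h | ⟨hprev, hjk⟩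
          · exact Or.inl h
          · rcases Nat.lt_or_ge j k with h2 | h2
            · exact Or.inr ⟨hprev, h2⟩
            · exfalso
              have : j = k := by omega
              rw [this, hprev] at a
              exact hsrc a
      rw [if_congr e1 rfl (if_congr e2 rfl rfl)]


-- ---- south phase: whole grid ----

lemma pvSPart_zero (g : List (List Char)) (i j : Nat) : pvSPart g 0 0 i j = pvCell g i j := by
  unfold pvSPart
  rw [if_neg (by rintro ⟨-, h⟩; omega), if_neg (by rintro ⟨-, h⟩; omega)]

lemma southPhase_fold (g : List (List Char)) (W : Nat) (hrect : pvRect g W) :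
    ∀ (l : List (List Char)) (y : Nat) (acc : List (List Char)) (m : Int),
    g.drop y = l → acc.length = g.length →
    (∀ i, i < g.length → (acc.getD i []).length = (g.getD i []).length) →
    (∀ i j, i < g.length → j < W → pvCell acc i j = pvSPart g y 0 i j) →
    (l.zipIdx y).foldl (fun st yr => yr.1.zipIdx.foldl (pvSBody g yr.2) st) (acc, m)
      = (pvSPartGrid g g.length 0,
         m + ((l.zipIdx y).map (fun ry =>
            (((ry.1.zipIdx.countP (fun cx => pvSouthMove g ry.2 cx.2 cx.1)) : Nat) : Int))).sum) := by
  intro l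
  induction l with
  | nil =>
    intro y acc m hdrop hlen hrows hinv
    have hy : g.length ≤ y := by
      have := congrArg List.length hdrop
      simp only [List.length_drop, List.length_nil] at this
      omega
    simp only [List.zipIdx_nil, List.foldl_nil, List.map_nil, List.sum_nil, add_zero]
    rw [pvSPartGrid_ext g W hrect g.length 0 acc hlen hrows ?_]
    intro i j hi hj
    rw [hinv i j hi hj]
    unfold pvSPart
    have hp : (i + g.length - 1) % g.length < g.length := Nat.mod_lt _ (by omega)
    have e1 : (pvSSrc g i j = true ∧ (i < y ∨ (i = y ∧ j < 0))) ↔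
        (pvSSrc g i j = true ∧ (i < g.length ∨ (i = g.length ∧ j < 0))) := by
      constructor
      · rintro ⟨a, -⟩; exact ⟨a, Or.inl hi⟩
      · rintro ⟨a, -⟩; exact ⟨a, Or.inl (by omega)⟩
    have e2 : (pvSSrc g ((i + g.length - 1) % g.length) j = true ∧
          ((i + g.length - 1) % g.length < y ∨ ((i + g.length - 1) % g.length = y ∧ j < 0))) ↔
        (pvSSrc g ((i + g.length - 1) % g.length) j = true ∧
          ((i + g.length - 1) % g.length < g.length ∨
            ((i + g.length - 1) % g.length = g.length ∧ j < 0))) := by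
      constructor
      · rintro ⟨a, -⟩; exact ⟨a, Or.inl hp⟩
      · rintro ⟨a, -⟩; exact ⟨a, Or.inl (by omega)⟩
    rw [if_congr e1 rfl (if_congr e2 rfl rfl)]
  | cons r l' ih =>
    intro y acc m hdrop hlen hrows hinv
    have hy : y < g.length := by
      by_contra h
      rw [List.drop_eq_nil_of_le (by omega)] at hdrop
      exact (List.cons_ne_nil r l') hdrop.symm
    have hspl := List.drop_eq_getElem_cons hy
    rw [hdrop] at hspl
    have hr : r = g[y] := (List.cons_eq_cons.mp hspl).1
    have hl' : g.drop (y + 1) = l' := ((List.cons_eq_cons.mp hspl).2).symm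
    have hrg : r = g.getD y [] := by rw [List.getD_eq_getElem _ _ hy, ← hr]
    rw [List.zipIdx_cons, List.foldl_cons, List.map_cons, List.sum_cons]
    rw [show (r.zipIdx.foldl (pvSBody g y) (acc, m))
        = ((r.zipIdx 0).foldl (pvSBody g y) (acc, m)) from rfl]
    rw [southRow_fold g W hrect y hy r 0 acc m (by rw [← hrg, List.drop_zero]) hlen hrows
      (by intro i j hi hj; exact hinv i j hi hj)]
    rw [ih (y + 1) (pvSPartGrid g (y + 1) 0) _ hl' (pvSPartGrid_length g (y + 1) 0)
      (fun i hi => pvSPartGrid_row_length g (y + 1) 0 i hi) ?_]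
    · rw [Prod.mk.injEq]
      refine ⟨rfl, by push_cast; ring⟩
    · intro i j hi hj
      rw [pvSPartGrid_cell g (y + 1) 0 i j hi (by
        rw [List.getD_eq_getElem _ _ hi, hrect g[i] (List.getElem_mem _)]; exact hj)]

lemma pvSouth_length (g : List (List Char)) : (pvSouth g).length = g.length := by
  simp [pvSouth]

lemma pvSouth_row (g : List (List Char)) (i : Nat) (hi : i < g.length) :
    (pvSouth g).getD i [] = g[i].zipIdx.map (fun cx =>
      if cx.1 = 'v' ∧ pvCell g ((i + 1) % g.length) cx.2 = '.' then '.'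
      else if cx.1 = '.' ∧ pvCell g ((i + g.length - 1) % g.length) cx.2 = 'v' then 'v'
      else cx.1) := by
  have hi' : i < (pvSouth g).length := by rw [pvSouth_length]; exact hi
  rw [List.getD_eq_getElem _ _ hi']
  simp [pvSouth, List.getElem_map, List.getElem_zipIdx]

lemma pvSouth_cell (g : List (List Char)) (i j : Nat) (hi : i < g.length)
    (hj : j < (g.getD i []).length) :
    pvCell (pvSouth g) i j =
      if pvCell g i j = 'v' ∧ pvCell g ((i + 1) % g.length) j = '.' then '.'
      else if pvCell g i j = '.' ∧ pvCell g ((i + g.length - 1) % g.length) j = 'v' then 'v'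
      else pvCell g i j := by
  have hj' : j < g[i].length := by rwa [List.getD_eq_getElem _ _ hi] at hj
  rw [pvCell, pvSouth_row g i hi]
  have hj'' : j < (g[i].zipIdx.map (fun cx =>
      if cx.1 = 'v' ∧ pvCell g ((i + 1) % g.length) cx.2 = '.' then '.'
      else if cx.1 = '.' ∧ pvCell g ((i + g.length - 1) % g.length) cx.2 = 'v' then 'v'
      else cx.1)).length := by simpa
  rw [List.getD_eq_getElem _ _ hj'']
  have hcg : pvCell g i j = g[i][j] := by
    rw [pvCell, List.getD_eq_getElem _ [] hi, List.getD_eq_getElem _ _ hj']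
  simp [List.getElem_map, List.getElem_zipIdx, hcg]

lemma pvSouth_eq_canonical (g : List (List Char)) (W : Nat) (hrect : pvRect g W) :
    pvSouth g = pvSPartGrid g g.length 0 := by
  apply pvSPartGrid_ext g W hrect _ _ _ (pvSouth_length g) ?_ ?_
  · intro i hi
    rw [pvSouth_row g i hi, List.getD_eq_getElem _ _ hi]
    simp
  · intro i j hi hj
    have hjr : j < (g.getD i []).length := by
      rw [List.getD_eq_getElem _ _ hi, hrect g[i] (List.getElem_mem _)]; exact hj
    rw [pvSouth_cell g i j hi hjr]
    have hH : 0 < g.length := by omega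
    have hp : (i + g.length - 1) % g.length < g.length := Nat.mod_lt _ (by omega)
    unfold pvSPart
    have e1 : (pvCell g i j = 'v' ∧ pvCell g ((i + 1) % g.length) j = '.') ↔
        (pvSSrc g i j = true ∧ (i < g.length ∨ (i = g.length ∧ j < 0))) := by
      rw [pvSSrc_iff']
      constructor
      · intro h; exact ⟨h, Or.inl hi⟩
      · rintro ⟨h, -⟩; exact h
    have e2 : (pvCell g i j = '.' ∧ pvCell g ((i + g.length - 1) % g.length) j = 'v') ↔
        (pvSSrc g ((i + g.length - 1) % g.length) j = true ∧
          ((i + g.length - 1) % g.length < g.length ∨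
            ((i + g.length - 1) % g.length = g.length ∧ j < 0))) := by
      rw [pvSSrc_iff', pvNext_prev g.length i hi]
      constructor
      · rintro ⟨h1, h2⟩; exact ⟨⟨h2, h1⟩, Or.inl hp⟩
      · rintro ⟨⟨h1, h2⟩, -⟩; exact ⟨h2, h1⟩
    rw [if_congr e1 rfl (if_congr e2 rfl rfl)]

lemma southPhase_eq (g : List (List Char)) (W : Nat) (hrect : pvRect g W) (m0 : Int) :
    pvSouthPhase g g m0 = (pvSouth g, m0 + pvCntS g) := by
  rw [pvSouthPhase_eq_body, pvSouth_eq_canonical g W hrect]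
  exact southPhase_fold g W hrect g 0 g m0 rfl rfl (fun i hi => rfl)
    (fun i j hi hj => (pvSPart_zero g i j).symm)


-- ---- shape preservation ----

lemma pvEast_length (g : List (List Char)) : (pvEast g).length = g.length := by
  simp [pvEast]

lemma pvEast_rect (g : List (List Char)) (W : Nat) (hrect : pvRect g W) :
    pvRect (pvEast g) W := by
  intro r hr
  rw [pvEast, List.mem_map] at hr
  obtain ⟨r0, hr0, rfl⟩ := hr
  rw [pvEastRow_length]
  exact hrect r0 hr0

lemma pvSouth_rect (g : List (List Char)) (W : Nat) (hrect : pvRect g W) :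
    pvRect (pvSouth g) W := by
  intro r hr
  rw [List.mem_iff_getElem] at hr
  obtain ⟨i, hi, rfl⟩ := hr
  have hi' : i < g.length := by rw [← pvSouth_length g]; exact hi
  rw [← List.getD_eq_getElem _ [] hi, pvSouth_row g i hi']
  rw [List.length_map, List.length_zipIdx]
  exact hrect g[i] (List.getElem_mem _)

lemma pvEast_getD (g : List (List Char)) (i : Nat) (hi : i < g.length) :
    (pvEast g).getD i [] = pvEastRow (g.getD i []) := by
  have hi' : i < (pvEast g).length := by rw [pvEast_length]; exact hi
  rw [List.getD_eq_getElem _ _ hi', List.getD_eq_getElem _ _ hi]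
  simp [pvEast, List.getElem_map]

lemma east_phase_eq' (g : List (List Char)) : pvEastPhase g = (pvEast g, pvCntE g) := by
  rw [eastPhase_eq]; rfl

-- ---- counts are nonnegative, and zero exactly when nothing can move ----

lemma pvCntE_nonneg (g : List (List Char)) : 0 ≤ pvCntE g := by
  apply List.sum_nonneg
  intro x hx
  rw [List.mem_map] at hx
  obtain ⟨r, -, rfl⟩ := hx
  positivity

lemma pvCntS_nonneg (g : List (List Char)) : 0 ≤ pvCntS g := by
  apply List.sum_nonneg
  intro x hx
  rw [List.mem_map] at hx
  obtain ⟨r, -, rfl⟩ := hx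
  positivity

lemma pvCntE_zero_iff (g : List (List Char)) :
    pvCntE g = 0 ↔ ∀ r ∈ g, ∀ cx ∈ r.zipIdx, ¬ pvEastMove r cx.2 cx.1 = true := by
  unfold pvCntE
  constructor
  · intro h r hr cx hcx
    have hz : ∀ x ∈ g.map (fun r =>
        (((r.zipIdx.countP (fun cx => pvEastMove r cx.2 cx.1)) : Nat) : Int)), x = 0 :=
      fun x hx => List.all_zero_of_le_zero_le_of_sum_eq_zero
        (by
          intro x' hx'
          rw [List.mem_map] at hx'
          obtain ⟨r', -, rfl⟩ := hx'
          positivity) h hx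
    have := hz _ (List.mem_map_of_mem hr)
    rw [Nat.cast_eq_zero, List.countP_eq_zero] at this
    exact this cx hcx
  · intro h
    apply List.sum_eq_zero
    intro x hx
    rw [List.mem_map] at hx
    obtain ⟨r, hr, rfl⟩ := hx
    rw [Nat.cast_eq_zero, List.countP_eq_zero]
    exact h r hr

lemma pvCntS_zero_iff (g : List (List Char)) :
    pvCntS g = 0 ↔ ∀ ry ∈ g.zipIdx, ∀ cx ∈ ry.1.zipIdx,
      ¬ pvSouthMove g ry.2 cx.2 cx.1 = true := by
  unfold pvCntS
  constructor
  · intro h ry hry cx hcx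
    have hz : ∀ x ∈ g.zipIdx.map (fun ry =>
        (((ry.1.zipIdx.countP (fun cx => pvSouthMove g ry.2 cx.2 cx.1)) : Nat) : Int)), x = 0 :=
      fun x hx => List.all_zero_of_le_zero_le_of_sum_eq_zero
        (by
          intro x' hx'
          rw [List.mem_map] at hx'
          obtain ⟨r', -, rfl⟩ := hx'
          positivity) h hx
    have := hz _ (List.mem_map_of_mem hry)
    rw [Nat.cast_eq_zero, List.countP_eq_zero] at this
    exact this cx hcx
  · intro h
    apply List.sum_eq_zero
    intro x hx
    rw [List.mem_map] at hx
    obtain ⟨ry, hry, rfl⟩ := hx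
    rw [Nat.cast_eq_zero, List.countP_eq_zero]
    exact h ry hry

lemma pvMem_zipIdx_self {α : Type} [Inhabited α] (l : List α) (i : Nat) (hi : i < l.length) :
    (l[i], i) ∈ l.zipIdx := by
  have hi' : i < l.zipIdx.length := by simpa
  have hget : l.zipIdx[i] = (l[i], 0 + i) := List.getElem_zipIdx hi'
  rw [Nat.zero_add] at hget
  rw [← hget]
  exact List.getElem_mem hi'

-- ---- pvPos with a rectangular width ----

lemma pvPos_iff (g : List (List Char)) (W : Nat) (hrect : pvRect g W) (c : Char)
    (p : Nat × Nat) :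
    pvPos g c p ↔ (p.2 < g.length ∧ p.1 < W ∧ pvCell g p.2 p.1 = c) := by
  unfold pvPos
  constructor
  · rintro ⟨h1, h2, h3⟩
    rw [pvRowLen g W hrect h1] at h2
    exact ⟨h1, h2, h3⟩
  · rintro ⟨h1, h2, h3⟩
    rw [← pvRowLen g W hrect h1] at h2
    exact ⟨h1, h2, h3⟩

lemma mem_posList (rows : List (List Char)) (k : Char) (p : Nat × Nat) :
    p ∈ pvPosList rows k ↔ pvPos rows k p := by
  unfold pvPosList
  rw [List.mem_flatMap]
  constructor
  · rintro ⟨ry, hry, hp⟩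
    rw [List.mem_filterMap] at hp
    obtain ⟨cx, hcx, heq⟩ := hp
    by_cases hck : cx.1 = k
    · rw [if_pos hck, Option.some.injEq] at heq
      obtain ⟨-, hylt, hyval⟩ := List.mem_zipIdx hry
      rw [Nat.zero_add] at hylt
      have hyval' : ry.1 = rows[ry.2]'(by omega) := by simpa using hyval
      obtain ⟨-, hxlt, hxval⟩ := List.mem_zipIdx hcx
      rw [Nat.zero_add] at hxlt
      have hxval' : cx.1 = ry.1[cx.2]'(by omega) := by simpa using hxval
      subst heq
      refine ⟨by simpa using hylt, ?_, ?_⟩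
      · simp only
        rw [List.getD_eq_getElem rows [] (by simpa using hylt), ← hyval']
        simpa using hxlt
      · simp only [pvCell]
        rw [List.getD_eq_getElem rows [] (by simpa using hylt), ← hyval',
          List.getD_eq_getElem _ _ (by simpa using hxlt), ← hxval']
        exact hck
    · rw [if_neg hck] at heq
      exact absurd heq (by simp)
  · rintro ⟨hy, hx, hc⟩
    refine ⟨(rows[p.2]'hy, p.2), pvMem_zipIdx_self rows p.2 hy, ?_⟩
    rw [List.mem_filterMap]
    have hx' : p.1 < (rows[p.2]'hy).length := by
      rw [← List.getD_eq_getElem rows [] hy]; exact hx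
    refine ⟨((rows[p.2]'hy)[p.1]'hx', p.1), pvMem_zipIdx_self _ p.1 hx', ?_⟩
    have hck : (rows[p.2]'hy)[p.1]'hx' = k := by
      rw [← hc]
      simp only [pvCell]
      rw [List.getD_eq_getElem rows [] hy, List.getD_eq_getElem _ _ hx']
    rw [if_pos hck]

-- ---- per-cell rules of the pure phases ----

lemma eastCell_rule (g : List (List Char)) (W : Nat) (hrect : pvRect g W) {y x : Nat}
    (hy : y < g.length) (hx : x < W) :
    pvCell (pvEast g) y x =
      (if pvESrc (g.getD y []) x then '.'
       else if pvESrc (g.getD y []) ((x + W - 1) % W) then '>'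
       else pvCell g y x) := by
  have hw := pvRowLen g W hrect hy
  have hx' : x < (g.getD y []).length := by rw [hw]; exact hx
  have h1 : pvCell (pvEast g) y x = (pvEastRow (g.getD y [])).getD x '?' := by
    rw [pvCell, pvEast_getD g y hy]
  rw [h1, pvEastRow_getD _ x hx', hw]
  rfl

-- facts about the atoms
lemma pvESrc_cell (g : List (List Char)) (W : Nat) (hrect : pvRect g W) {y x : Nat}
    (hy : y < g.length) (hx : x < W)
    (h : pvESrc (g.getD y []) x = true) : pvCell g y x = '>' := by
  have hw := pvRowLen g W hrect hy
  have hx' : x < (g.getD y []).length := by rw [hw]; exact hx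
  have := ((pvESrc_iff _ x hx').mp h).1
  rw [pvCell, List.getD_eq_getElem _ _ hx']
  exact this

lemma pvESrc_prev_cell (g : List (List Char)) (W : Nat) (hrect : pvRect g W) {y x : Nat}
    (hy : y < g.length) (hx : x < W)
    (h : pvESrc (g.getD y []) ((x + W - 1) % W) = true) : pvCell g y x = '.' := by
  have hw := pvRowLen g W hrect hy
  have hx' : x < (g.getD y []).length := by rw [hw]; exact hx
  rw [← hw] at h
  have := ((pvESrc_prev_iff _ x hx').mp h).1
  rw [pvCell, List.getD_eq_getElem _ _ hx']
  exact this

lemma pvESrc_as_eastmove (g : List (List Char)) (W : Nat) (hrect : pvRect g W) {y x : Nat}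
    (hy : y < g.length) (hx : x < W) :
    pvESrc (g.getD y []) x = true ↔
      (pvCell g y x = '>' ∧ pvCell g y ((x + 1) % W) = '.') := by
  have hw := pvRowLen g W hrect hy
  have hx' : x < (g.getD y []).length := by rw [hw]; exact hx
  rw [pvESrc_iff _ x hx']
  constructor
  · rintro ⟨h1, h2⟩
    refine ⟨?_, ?_⟩
    · rw [pvCell, List.getD_eq_getElem _ _ hx']; exact h1
    · rw [pvCell, ← hw]; exact h2
  · rintro ⟨h1, h2⟩
    refine ⟨?_, ?_⟩
    · rw [pvCell, List.getD_eq_getElem _ _ hx'] at h1; exact h1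
    · rw [pvCell, ← hw] at h2; exact h2

-- ---- membership of B's intermediate sets, against the grid ----

lemma mem_em_iff (g : List (List Char)) (W : Nat) (hrect : pvRect g W)
    (E D : PySem.Set (Nat × Nat))
    (hE : ∀ p, p ∈ E ↔ pvPos g '>' p) (hD : ∀ p, p ∈ D ↔ pvPos g '.' p) (p : Nat × Nat) :
    p ∈ PySem.Set.ofList (E.filter (fun q => PySem.Set.contains D ((q.1 + 1) % W, q.2))) ↔
      (p.2 < g.length ∧ p.1 < W ∧ pvESrc (g.getD p.2 []) p.1 = true) := by
  rw [PySem.Set.mem_ofList, List.mem_filter, PySem.Set.contains_iff, hE p, hD _,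
    pvPos_iff g W hrect, pvPos_iff g W hrect]
  constructor
  · rintro ⟨⟨hy, hx, hc⟩, ⟨-, -, hdot⟩⟩
    exact ⟨hy, hx, (pvESrc_as_eastmove g W hrect hy hx).mpr ⟨hc, hdot⟩⟩
  · rintro ⟨hy, hx, hsrc⟩
    obtain ⟨hc, hdot⟩ := (pvESrc_as_eastmove g W hrect hy hx).mp hsrc
    exact ⟨⟨hy, hx, hc⟩, hy, Nat.mod_lt _ (by omega), hdot⟩

lemma mem_et_iff (g : List (List Char)) (W : Nat) (hrect : pvRect g W)
    (E D : PySem.Set (Nat × Nat))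
    (hE : ∀ p, p ∈ E ↔ pvPos g '>' p) (hD : ∀ p, p ∈ D ↔ pvPos g '.' p) (p : Nat × Nat) :
    p ∈ PySem.Set.ofList
        ((PySem.Set.ofList (E.filter (fun q => PySem.Set.contains D ((q.1 + 1) % W, q.2)))).map
          (fun q => ((q.1 + 1) % W, q.2))) ↔
      (p.2 < g.length ∧ p.1 < W ∧ pvESrc (g.getD p.2 []) ((p.1 + W - 1) % W) = true) := by
  rw [PySem.Set.mem_ofList, List.mem_map]
  constructor
  · rintro ⟨q, hq, rfl⟩
    rw [mem_em_iff g W hrect E D hE hD] at hq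
    obtain ⟨hy, hx, hsrc⟩ := hq
    refine ⟨hy, Nat.mod_lt _ (by omega), ?_⟩
    simp only
    rw [pvPrev_next W q.1 hx]
    exact hsrc
  · rintro ⟨hy, hx, hsrc⟩
    refine ⟨((p.1 + W - 1) % W, p.2), ?_, ?_⟩
    · rw [mem_em_iff g W hrect E D hE hD]
      exact ⟨hy, Nat.mod_lt _ (by omega), hsrc⟩
    · simp only
      rw [pvNext_prev W p.1 hx]

lemma mem_eastNew (g : List (List Char)) (W : Nat) (hrect : pvRect g W)
    (E D : PySem.Set (Nat × Nat))
    (hE : ∀ p, p ∈ E ↔ pvPos g '>' p) (hD : ∀ p, p ∈ D ↔ pvPos g '.' p) (p : Nat × Nat) :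
    (let em := PySem.Set.ofList (E.filter (fun q => PySem.Set.contains D ((q.1 + 1) % W, q.2)))
     let et := PySem.Set.ofList (em.map (fun q => ((q.1 + 1) % W, q.2)))
     p ∈ PySem.Set.union (PySem.Set.diff E em) et) ↔ pvPos (pvEast g) '>' p := by
  simp only
  rw [PySem.Set.mem_union, PySem.Set.mem_diff,
    mem_em_iff g W hrect E D hE hD, mem_et_iff g W hrect E D hE hD, hE p,
    pvPos_iff g W hrect,
    pvPos_iff (pvEast g) W (pvEast_rect g W hrect)]
  rw [pvEast_length]
  constructor
  · rintro (⟨⟨hy, hx, hc⟩, hnm⟩ | ⟨hy, hx, hprev⟩)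
    · have hnsrc : ¬ pvESrc (g.getD p.2 []) p.1 = true := fun hs => hnm ⟨hy, hx, hs⟩
      refine ⟨hy, hx, ?_⟩
      rw [eastCell_rule g W hrect hy hx, if_neg hnsrc]
      by_cases hb : pvESrc (g.getD p.2 []) ((p.1 + W - 1) % W) = true
      · rw [if_pos hb]
      · rw [if_neg hb]; exact hc
    · refine ⟨hy, hx, ?_⟩
      rw [eastCell_rule g W hrect hy hx]
      have hnsrc : ¬ pvESrc (g.getD p.2 []) p.1 = true := by
        intro hs
        have h1 := pvESrc_cell g W hrect hy hx hs
        have h2 := pvESrc_prev_cell g W hrect hy hx hprev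
        rw [h1] at h2
        exact absurd h2 (by decide)
      rw [if_neg hnsrc, if_pos hprev]
  · rintro ⟨hy, hx, hc⟩
    rw [eastCell_rule g W hrect hy hx] at hc
    by_cases ha : pvESrc (g.getD p.2 []) p.1 = true
    · rw [if_pos ha] at hc
      exact absurd hc (by decide)
    · rw [if_neg ha] at hc
      by_cases hb : pvESrc (g.getD p.2 []) ((p.1 + W - 1) % W) = true
      · exact Or.inr ⟨hy, hx, hb⟩
      · rw [if_neg hb] at hc
        exact Or.inl ⟨⟨hy, hx, hc⟩, fun hm => ha hm.2.2⟩

lemma mem_dotsNew (g : List (List Char)) (W : Nat) (hrect : pvRect g W)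
    (E D : PySem.Set (Nat × Nat))
    (hE : ∀ p, p ∈ E ↔ pvPos g '>' p) (hD : ∀ p, p ∈ D ↔ pvPos g '.' p) (p : Nat × Nat) :
    (let em := PySem.Set.ofList (E.filter (fun q => PySem.Set.contains D ((q.1 + 1) % W, q.2)))
     let et := PySem.Set.ofList (em.map (fun q => ((q.1 + 1) % W, q.2)))
     p ∈ PySem.Set.diff (PySem.Set.union D em) et) ↔ pvPos (pvEast g) '.' p := by
  simp only
  rw [PySem.Set.mem_diff, PySem.Set.mem_union,
    mem_em_iff g W hrect E D hE hD, mem_et_iff g W hrect E D hE hD, hD p,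
    pvPos_iff g W hrect,
    pvPos_iff (pvEast g) W (pvEast_rect g W hrect)]
  rw [pvEast_length]
  constructor
  · rintro ⟨(⟨hy, hx, hc⟩ | ⟨hy, hx, hsrc⟩), hnt⟩
    · have hnb : ¬ pvESrc (g.getD p.2 []) ((p.1 + W - 1) % W) = true :=
        fun hb => hnt ⟨hy, hx, hb⟩
      refine ⟨hy, hx, ?_⟩
      rw [eastCell_rule g W hrect hy hx]
      by_cases ha : pvESrc (g.getD p.2 []) p.1 = true
      · rw [if_pos ha]
      · rw [if_neg ha, if_neg hnb]; exact hc
    · refine ⟨hy, hx, ?_⟩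
      rw [eastCell_rule g W hrect hy hx, if_pos hsrc]
  · rintro ⟨hy, hx, hc⟩
    rw [eastCell_rule g W hrect hy hx] at hc
    by_cases ha : pvESrc (g.getD p.2 []) p.1 = true
    · refine ⟨Or.inr ⟨hy, hx, ha⟩, ?_⟩
      rintro ⟨-, -, hb⟩
      have h1 := pvESrc_cell g W hrect hy hx ha
      have h2 := pvESrc_prev_cell g W hrect hy hx hb
      rw [h1] at h2
      exact absurd h2 (by decide)
    · rw [if_neg ha] at hc
      by_cases hb : pvESrc (g.getD p.2 []) ((p.1 + W - 1) % W) = true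
      · rw [if_pos hb] at hc
        exact absurd hc (by decide)
      · rw [if_neg hb] at hc
        exact ⟨Or.inl ⟨hy, hx, hc⟩, fun ht => hb ht.2.2⟩

lemma vCell_east (g : List (List Char)) (W : Nat) (hrect : pvRect g W) {y x : Nat}
    (hy : y < g.length) (hx : x < W) :
    pvCell (pvEast g) y x = 'v' ↔ pvCell g y x = 'v' := by
  rw [eastCell_rule g W hrect hy hx]
  by_cases ha : pvESrc (g.getD y []) x = true
  · rw [if_pos ha]
    have := pvESrc_cell g W hrect hy hx ha
    constructor
    · intro h; exact absurd h (by decide)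
    · intro h; rw [this] at h; exact absurd h (by decide)
  · rw [if_neg ha]
    by_cases hb : pvESrc (g.getD y []) ((x + W - 1) % W) = true
    · rw [if_pos hb]
      have := pvESrc_prev_cell g W hrect hy hx hb
      constructor
      · intro h; exact absurd h (by decide)
      · intro h; rw [this] at h; exact absurd h (by decide)
    · rw [if_neg hb]

lemma mem_south_east (g : List (List Char)) (W : Nat) (hrect : pvRect g W)
    (S : PySem.Set (Nat × Nat)) (hS : ∀ p, p ∈ S ↔ pvPos g 'v' p) (p : Nat × Nat) :
    p ∈ S ↔ pvPos (pvEast g) 'v' p := by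
  rw [hS p, pvPos_iff g W hrect, pvPos_iff (pvEast g) W (pvEast_rect g W hrect),
    pvEast_length]
  constructor
  · rintro ⟨hy, hx, hc⟩
    exact ⟨hy, hx, (vCell_east g W hrect hy hx).mpr hc⟩
  · rintro ⟨hy, hx, hc⟩
    exact ⟨hy, hx, (vCell_east g W hrect hy hx).mp hc⟩

-- ---- south-phase membership (g1 is the post-east grid) ----

lemma pvSSrc_prev_iff (g1 : List (List Char)) {y x : Nat} (hy : y < g1.length) :
    pvSSrc g1 ((y + g1.length - 1) % g1.length) x = true ↔
      (pvCell g1 ((y + g1.length - 1) % g1.length) x = 'v' ∧ pvCell g1 y x = '.') := by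
  rw [pvSSrc_iff', pvNext_prev g1.length y hy]

lemma southCell_rule (g1 : List (List Char)) {y x : Nat} (hy : y < g1.length)
    (hx : x < (g1.getD y []).length) :
    pvCell (pvSouth g1) y x =
      (if pvSSrc g1 y x then '.'
       else if pvSSrc g1 ((y + g1.length - 1) % g1.length) x then 'v'
       else pvCell g1 y x) := by
  rw [pvSouth_cell g1 y x hy hx]
  have e1 := pvSSrc_iff' g1 y x
  have e2 := pvSSrc_prev_iff g1 (x := x) hy
  by_cases ha : pvSSrc g1 y x = true
  · rw [if_pos (e1.mp ha), if_pos ha]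
  · rw [if_neg (fun hc => ha (e1.mpr hc)), if_neg ha]
    by_cases hb : pvSSrc g1 ((y + g1.length - 1) % g1.length) x = true
    · obtain ⟨h1, h2⟩ := e2.mp hb
      rw [if_pos ⟨h2, h1⟩, if_pos hb]
    · rw [if_neg (fun hc => hb (e2.mpr ⟨hc.2, hc.1⟩)), if_neg hb]

lemma mem_sm_iff (g1 : List (List Char)) (W : Nat) (hrect1 : pvRect g1 W)
    (S D1 : PySem.Set (Nat × Nat))
    (hS : ∀ p, p ∈ S ↔ pvPos g1 'v' p) (hD1 : ∀ p, p ∈ D1 ↔ pvPos g1 '.' p) (p : Nat × Nat) :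
    p ∈ PySem.Set.ofList
        (S.filter (fun q => PySem.Set.contains D1 (q.1, (q.2 + 1) % g1.length))) ↔
      (p.2 < g1.length ∧ p.1 < W ∧ pvSSrc g1 p.2 p.1 = true) := by
  rw [PySem.Set.mem_ofList, List.mem_filter, PySem.Set.contains_iff, hS p, hD1 _,
    pvPos_iff g1 W hrect1, pvPos_iff g1 W hrect1]
  constructor
  · rintro ⟨⟨hy, hx, hc⟩, ⟨-, -, hdot⟩⟩
    exact ⟨hy, hx, (pvSSrc_iff' g1 p.2 p.1).mpr ⟨hc, hdot⟩⟩
  · rintro ⟨hy, hx, hsrc⟩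
    obtain ⟨hc, hdot⟩ := (pvSSrc_iff' g1 p.2 p.1).mp hsrc
    exact ⟨⟨hy, hx, hc⟩, Nat.mod_lt _ (by omega), hx, hdot⟩

lemma mem_st_iff (g1 : List (List Char)) (W : Nat) (hrect1 : pvRect g1 W)
    (S D1 : PySem.Set (Nat × Nat))
    (hS : ∀ p, p ∈ S ↔ pvPos g1 'v' p) (hD1 : ∀ p, p ∈ D1 ↔ pvPos g1 '.' p) (p : Nat × Nat) :
    p ∈ PySem.Set.ofList
        ((PySem.Set.ofList
          (S.filter (fun q => PySem.Set.contains D1 (q.1, (q.2 + 1) % g1.length)))).map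
            (fun q => (q.1, (q.2 + 1) % g1.length))) ↔
      (p.2 < g1.length ∧ p.1 < W ∧
        pvSSrc g1 ((p.2 + g1.length - 1) % g1.length) p.1 = true) := by
  rw [PySem.Set.mem_ofList, List.mem_map]
  constructor
  · rintro ⟨q, hq, rfl⟩
    rw [mem_sm_iff g1 W hrect1 S D1 hS hD1] at hq
    obtain ⟨hy, hx, hsrc⟩ := hq
    refine ⟨Nat.mod_lt _ (by omega), hx, ?_⟩
    simp only
    rw [pvPrev_next g1.length q.2 hy]
    exact hsrc
  · rintro ⟨hy, hx, hsrc⟩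
    refine ⟨(p.1, (p.2 + g1.length - 1) % g1.length), ?_, ?_⟩
    · rw [mem_sm_iff g1 W hrect1 S D1 hS hD1]
      exact ⟨Nat.mod_lt _ (by omega), hx, hsrc⟩
    · simp only
      rw [pvNext_prev g1.length p.2 hy]

lemma mem_southNew (g1 : List (List Char)) (W : Nat) (hrect1 : pvRect g1 W)
    (S D1 : PySem.Set (Nat × Nat))
    (hS : ∀ p, p ∈ S ↔ pvPos g1 'v' p) (hD1 : ∀ p, p ∈ D1 ↔ pvPos g1 '.' p) (p : Nat × Nat) :
    (let sm := PySem.Set.ofList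
        (S.filter (fun q => PySem.Set.contains D1 (q.1, (q.2 + 1) % g1.length)))
     let st := PySem.Set.ofList (sm.map (fun q => (q.1, (q.2 + 1) % g1.length)))
     p ∈ PySem.Set.union (PySem.Set.diff S sm) st) ↔ pvPos (pvSouth g1) 'v' p := by
  simp only
  rw [PySem.Set.mem_union, PySem.Set.mem_diff,
    mem_sm_iff g1 W hrect1 S D1 hS hD1, mem_st_iff g1 W hrect1 S D1 hS hD1, hS p,
    pvPos_iff g1 W hrect1,
    pvPos_iff (pvSouth g1) W (pvSouth_rect g1 W hrect1), pvSouth_length]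
  have hxr : ∀ {y x : Nat}, y < g1.length → x < W → x < (g1.getD y []).length := by
    intro y x hy hx
    rw [pvRowLen g1 W hrect1 hy]; exact hx
  constructor
  · rintro (⟨⟨hy, hx, hc⟩, hnm⟩ | ⟨hy, hx, hprev⟩)
    · have hnsrc : ¬ pvSSrc g1 p.2 p.1 = true := fun hs => hnm ⟨hy, hx, hs⟩
      refine ⟨hy, hx, ?_⟩
      rw [southCell_rule g1 hy (hxr hy hx), if_neg hnsrc]
      by_cases hb : pvSSrc g1 ((p.2 + g1.length - 1) % g1.length) p.1 = true
      · rw [if_pos hb]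
      · rw [if_neg hb]; exact hc
    · refine ⟨hy, hx, ?_⟩
      have hnsrc : ¬ pvSSrc g1 p.2 p.1 = true := by
        intro hs
        have h1 := ((pvSSrc_iff' g1 p.2 p.1).mp hs).1
        have h2 := ((pvSSrc_prev_iff g1 hy).mp hprev).2
        rw [h1] at h2
        exact absurd h2 (by decide)
      rw [southCell_rule g1 hy (hxr hy hx), if_neg hnsrc, if_pos hprev]
  · rintro ⟨hy, hx, hc⟩
    rw [southCell_rule g1 hy (hxr hy hx)] at hc
    by_cases ha : pvSSrc g1 p.2 p.1 = true
    · rw [if_pos ha] at hc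
      exact absurd hc (by decide)
    · rw [if_neg ha] at hc
      by_cases hb : pvSSrc g1 ((p.2 + g1.length - 1) % g1.length) p.1 = true
      · exact Or.inr ⟨hy, hx, hb⟩
      · rw [if_neg hb] at hc
        exact Or.inl ⟨⟨hy, hx, hc⟩, fun hm => ha hm.2.2⟩

lemma mem_dotsNew2 (g1 : List (List Char)) (W : Nat) (hrect1 : pvRect g1 W)
    (S D1 : PySem.Set (Nat × Nat))
    (hS : ∀ p, p ∈ S ↔ pvPos g1 'v' p) (hD1 : ∀ p, p ∈ D1 ↔ pvPos g1 '.' p) (p : Nat × Nat) :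
    (let sm := PySem.Set.ofList
        (S.filter (fun q => PySem.Set.contains D1 (q.1, (q.2 + 1) % g1.length)))
     let st := PySem.Set.ofList (sm.map (fun q => (q.1, (q.2 + 1) % g1.length)))
     p ∈ PySem.Set.diff (PySem.Set.union D1 sm) st) ↔ pvPos (pvSouth g1) '.' p := by
  simp only
  rw [PySem.Set.mem_diff, PySem.Set.mem_union,
    mem_sm_iff g1 W hrect1 S D1 hS hD1, mem_st_iff g1 W hrect1 S D1 hS hD1, hD1 p,
    pvPos_iff g1 W hrect1,
    pvPos_iff (pvSouth g1) W (pvSouth_rect g1 W hrect1), pvSouth_length]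
  have hxr : ∀ {y x : Nat}, y < g1.length → x < W → x < (g1.getD y []).length := by
    intro y x hy hx
    rw [pvRowLen g1 W hrect1 hy]; exact hx
  constructor
  · rintro ⟨(⟨hy, hx, hc⟩ | ⟨hy, hx, hsrc⟩), hnt⟩
    · have hnb : ¬ pvSSrc g1 ((p.2 + g1.length - 1) % g1.length) p.1 = true :=
        fun hb => hnt ⟨hy, hx, hb⟩
      refine ⟨hy, hx, ?_⟩
      rw [southCell_rule g1 hy (hxr hy hx)]
      by_cases ha : pvSSrc g1 p.2 p.1 = true
      · rw [if_pos ha]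
      · rw [if_neg ha, if_neg hnb]; exact hc
    · refine ⟨hy, hx, ?_⟩
      rw [southCell_rule g1 hy (hxr hy hx), if_pos hsrc]
  · rintro ⟨hy, hx, hc⟩
    rw [southCell_rule g1 hy (hxr hy hx)] at hc
    by_cases ha : pvSSrc g1 p.2 p.1 = true
    · refine ⟨Or.inr ⟨hy, hx, ha⟩, ?_⟩
      rintro ⟨-, -, hb⟩
      have h1 := ((pvSSrc_iff' g1 p.2 p.1).mp ha).1
      have h2 := ((pvSSrc_prev_iff g1 hy).mp hb).2
      rw [h1] at h2
      exact absurd h2 (by decide)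
    · rw [if_neg ha] at hc
      by_cases hb : pvSSrc g1 ((p.2 + g1.length - 1) % g1.length) p.1 = true
      · rw [if_pos hb] at hc
        exact absurd hc (by decide)
      · rw [if_neg hb] at hc
        exact ⟨Or.inl ⟨hy, hx, hc⟩, fun ht => hb ht.2.2⟩


lemma gtCell_south (g1 : List (List Char)) {y x : Nat} (hy : y < g1.length)
    (hx : x < (g1.getD y []).length) :
    pvCell (pvSouth g1) y x = '>' ↔ pvCell g1 y x = '>' := by
  rw [southCell_rule g1 hy hx]
  by_cases ha : pvSSrc g1 y x = true
  · rw [if_pos ha]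
    have := ((pvSSrc_iff' g1 y x).mp ha).1
    constructor
    · intro h; exact absurd h (by decide)
    · intro h; rw [this] at h; exact absurd h (by decide)
  · rw [if_neg ha]
    by_cases hb : pvSSrc g1 ((y + g1.length - 1) % g1.length) x = true
    · rw [if_pos hb]
      have := ((pvSSrc_prev_iff g1 hy).mp hb).2
      constructor
      · intro h; exact absurd h (by decide)
      · intro h; rw [this] at h; exact absurd h (by decide)
    · rw [if_neg hb]

lemma mem_east_south (g1 : List (List Char)) (W : Nat) (hrect1 : pvRect g1 W)
    (E : PySem.Set (Nat × Nat)) (hE : ∀ p, p ∈ E ↔ pvPos g1 '>' p) (p : Nat × Nat) :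
    p ∈ E ↔ pvPos (pvSouth g1) '>' p := by
  rw [hE p, pvPos_iff g1 W hrect1, pvPos_iff (pvSouth g1) W (pvSouth_rect g1 W hrect1),
    pvSouth_length]
  have hxr : ∀ {y x : Nat}, y < g1.length → x < W → x < (g1.getD y []).length := by
    intro y x hy hx
    rw [pvRowLen g1 W hrect1 hy]; exact hx
  constructor
  · rintro ⟨hy, hx, hc⟩
    exact ⟨hy, hx, (gtCell_south g1 hy (hxr hy hx)).mpr hc⟩
  · rintro ⟨hy, hx, hc⟩
    exact ⟨hy, hx, (gtCell_south g1 hy (hxr hy hx)).mp hc⟩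

-- ---- emptiness of the mover sets and the move counts ----

lemma em_nil_iff (g : List (List Char)) (W : Nat) (hrect : pvRect g W)
    (E D : PySem.Set (Nat × Nat))
    (hE : ∀ p, p ∈ E ↔ pvPos g '>' p) (hD : ∀ p, p ∈ D ↔ pvPos g '.' p) :
    (PySem.Set.ofList (E.filter (fun q => PySem.Set.contains D ((q.1 + 1) % W, q.2))) = []) ↔
      pvCntE g = 0 := by
  rw [List.eq_nil_iff_forall_not_mem, pvCntE_zero_iff]
  constructor
  · intro h r hr cx hcx hmv
    obtain ⟨y, hy, rfl⟩ := List.mem_iff_getElem.mp hr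
    obtain ⟨-, hxlt, hxval⟩ := List.mem_zipIdx hcx
    rw [Nat.zero_add] at hxlt
    have hxval' : cx.1 = g[y][cx.2]'(by omega) := by simpa using hxval
    have hsrc : pvESrc (g.getD y []) cx.2 = true := by
      rw [pvESrc, List.getD_eq_getElem g [] hy,
        List.getD_eq_getElem _ _ (by omega : cx.2 < g[y].length), ← hxval']
      exact hmv
    have hxW : cx.2 < W := by
      rw [← hrect g[y] (List.getElem_mem hy)]; omega
    exact h (cx.2, y)
      ((mem_em_iff g W hrect E D hE hD (cx.2, y)).mpr ⟨hy, hxW, hsrc⟩)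
  · intro h p hp
    rw [mem_em_iff g W hrect E D hE hD] at hp
    obtain ⟨hy, hx, hsrc⟩ := hp
    have hx' : p.1 < (g.getD p.2 []).length := by
      rw [pvRowLen g W hrect hy]; exact hx
    have hx'' : p.1 < g[p.2].length := by
      rw [← List.getD_eq_getElem g [] hy]; exact hx'
    apply h (g[p.2]'hy) (List.getElem_mem hy) ((g[p.2]'hy)[p.1]'hx'', p.1)
      (pvMem_zipIdx_self _ p.1 hx'')
    rw [pvESrc] at hsrc
    have : (g.getD p.2 []).getD p.1 '?' = (g[p.2]'hy)[p.1]'hx'' := by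
      rw [List.getD_eq_getElem g [] hy, List.getD_eq_getElem _ _ hx'']
    rw [this] at hsrc
    have hrow : g.getD p.2 [] = g[p.2]'hy := List.getD_eq_getElem g [] hy
    rw [hrow] at hsrc
    exact hsrc

lemma sm_nil_iff (g1 : List (List Char)) (W : Nat) (hrect1 : pvRect g1 W)
    (S D1 : PySem.Set (Nat × Nat))
    (hS : ∀ p, p ∈ S ↔ pvPos g1 'v' p) (hD1 : ∀ p, p ∈ D1 ↔ pvPos g1 '.' p) :
    (PySem.Set.ofList
        (S.filter (fun q => PySem.Set.contains D1 (q.1, (q.2 + 1) % g1.length))) = []) ↔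
      pvCntS g1 = 0 := by
  rw [List.eq_nil_iff_forall_not_mem, pvCntS_zero_iff]
  constructor
  · intro h ry hry cx hcx hmv
    obtain ⟨-, hylt, hyval⟩ := List.mem_zipIdx hry
    rw [Nat.zero_add] at hylt
    have hyval' : ry.1 = g1[ry.2]'(by omega) := by simpa using hyval
    obtain ⟨-, hxlt, hxval⟩ := List.mem_zipIdx hcx
    rw [Nat.zero_add] at hxlt
    have hxval' : cx.1 = ry.1[cx.2]'(by omega) := by simpa using hxval
    have hylt' : ry.2 < g1.length := by simpa using hylt
    have hxg : cx.2 < g1[ry.2].length := by rw [← hyval']; omega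
    have hsrc : pvSSrc g1 ry.2 cx.2 = true := by
      rw [pvSSrc]
      have hxval2 : cx.1 = (g1[ry.2]'hylt')[cx.2]'hxg := by
        rw [hxval']
        exact List.getElem_of_eq hyval' _
      have : pvCell g1 ry.2 cx.2 = cx.1 := by
        rw [pvCell, List.getD_eq_getElem g1 [] hylt', List.getD_eq_getElem _ _ hxg, hxval2]
      rw [this]
      exact hmv
    have hxW : cx.2 < W := by
      rw [← hrect1 g1[ry.2] (List.getElem_mem hylt')]; omega
    exact h (cx.2, ry.2)
      ((mem_sm_iff g1 W hrect1 S D1 hS hD1 (cx.2, ry.2)).mpr ⟨hylt', hxW, hsrc⟩)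
  · intro h p hp
    rw [mem_sm_iff g1 W hrect1 S D1 hS hD1] at hp
    obtain ⟨hy, hx, hsrc⟩ := hp
    have hx' : p.1 < (g1.getD p.2 []).length := by
      rw [pvRowLen g1 W hrect1 hy]; exact hx
    have hx'' : p.1 < g1[p.2].length := by
      rw [← List.getD_eq_getElem g1 [] hy]; exact hx'
    apply h (g1[p.2]'hy, p.2) (pvMem_zipIdx_self g1 p.2 hy)
      ((g1[p.2]'hy)[p.1]'hx'', p.1) (pvMem_zipIdx_self _ p.1 hx'')
    rw [pvSSrc] at hsrc
    have : pvCell g1 p.2 p.1 = (g1[p.2]'hy)[p.1]'hx'' := by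
      rw [pvCell, List.getD_eq_getElem g1 [] hy, List.getD_eq_getElem _ _ hx'']
    rw [this] at hsrc
    exact hsrc

-- ---- the two loops agree ----

lemma run_eq (W : Nat) : ∀ (f : Nat) (step : Int) (g : List (List Char))
    (E S D : PySem.Set (Nat × Nat)),
    pvRect g W → pvInv g E S D →
    pvRunA f step g = pvRunB f step W g.length E S D := by
  intro f
  induction f with
  | zero => intro step g E S D _ _; rfl
  | succ f ih =>
    intro step g E S D hrect hInv
    obtain ⟨hEn, hSn, hDn, hE, hS, hD⟩ := hInv
    have hrectE : pvRect (pvEast g) W := pvEast_rect g W hrect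
    have hrectS : pvRect (pvSouth (pvEast g)) W := pvSouth_rect _ W hrectE
    -- names for B's intermediate sets
    set em := PySem.Set.ofList (E.filter (fun q => PySem.Set.contains D ((q.1 + 1) % W, q.2)))
      with hemdef
    set et := PySem.Set.ofList (em.map (fun q => ((q.1 + 1) % W, q.2))) with hetdef
    set E' := PySem.Set.union (PySem.Set.diff E em) et with hE'def
    set D' := PySem.Set.diff (PySem.Set.union D em) et with hD'def
    -- post-east membership facts
    have hE' : ∀ p, p ∈ E' ↔ pvPos (pvEast g) '>' p := by
      intro p
      rw [hE'def, hetdef, hemdef]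
      exact mem_eastNew g W hrect E D hE hD p
    have hD' : ∀ p, p ∈ D' ↔ pvPos (pvEast g) '.' p := by
      intro p
      rw [hD'def, hetdef, hemdef]
      exact mem_dotsNew g W hrect E D hE hD p
    have hS' : ∀ p, p ∈ S ↔ pvPos (pvEast g) 'v' p := mem_south_east g W hrect S hS
    have hlenE : (pvEast g).length = g.length := pvEast_length g
    set sm := PySem.Set.ofList (S.filter (fun q => PySem.Set.contains D' (q.1, (q.2 + 1) % g.length)))
      with hsmdef
    set st := PySem.Set.ofList (sm.map (fun q => (q.1, (q.2 + 1) % g.length))) with hstdef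
    set S' := PySem.Set.union (PySem.Set.diff S sm) st with hS'def
    set D'' := PySem.Set.diff (PySem.Set.union D' sm) st with hD''def
    have hsmdef1 : sm = PySem.Set.ofList
        (S.filter (fun q => PySem.Set.contains D' (q.1, (q.2 + 1) % (pvEast g).length))) := by
      rw [hsmdef, hlenE]
    have hstdef1 : st = PySem.Set.ofList (sm.map (fun q => (q.1, (q.2 + 1) % (pvEast g).length))) := by
      rw [hstdef, hlenE]
    have hS2 : ∀ p, p ∈ S' ↔ pvPos (pvSouth (pvEast g)) 'v' p := by
      intro p
      rw [hS'def, hstdef1, hsmdef1]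
      exact mem_southNew (pvEast g) W hrectE S D' hS' hD' p
    have hD2 : ∀ p, p ∈ D'' ↔ pvPos (pvSouth (pvEast g)) '.' p := by
      intro p
      rw [hD''def, hstdef1, hsmdef1]
      exact mem_dotsNew2 (pvEast g) W hrectE S D' hS' hD' p
    -- nodups of the new sets
    have hE'n : E'.Nodup := by
      rw [hE'def]
      exact PySem.Set.nodup_union _ _ (PySem.Set.nodup_diff _ _ hEn)
    have hS'n : S'.Nodup := by
      rw [hS'def]
      exact PySem.Set.nodup_union _ _ (PySem.Set.nodup_diff _ _ hSn)
    have hD'n : D'.Nodup := by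
      rw [hD'def]
      exact PySem.Set.nodup_diff _ _ (PySem.Set.nodup_union _ _ hDn)
    have hD''n : D''.Nodup := by
      rw [hD''def]
      exact PySem.Set.nodup_diff _ _ (PySem.Set.nodup_union _ _ hD'n)
    -- the stopping tests agree
    have hemz : (em = []) ↔ pvCntE g = 0 := by
      rw [hemdef]; exact em_nil_iff g W hrect E D hE hD
    have hsmz : (sm = []) ↔ pvCntS (pvEast g) = 0 := by
      rw [hsmdef1]; exact sm_nil_iff (pvEast g) W hrectE S D' hS' hD'
    have hiff : (pvCntE g + pvCntS (pvEast g) = 0) ↔ (em = [] ∧ sm = []) := by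
      rw [hemz, hsmz]
      have h1 := pvCntE_nonneg g
      have h2 := pvCntS_nonneg (pvEast g)
      omega
    -- unfold one iteration of each loop
    show (let e := pvEastPhase g
          let s := pvSouthPhase e.1 e.1 e.2
          if s.2 = 0 then step else pvRunA f (step + 1) s.1)
        = pvRunB (f + 1) step W g.length E S D
    rw [east_phase_eq' g]
    simp only
    rw [southPhase_eq (pvEast g) W hrectE (pvCntE g)]
    simp only [pvRunB]
    rw [← hemdef, ← hetdef, ← hE'def, ← hD'def, ← hsmdef, ← hstdef, ← hS'def, ← hD''def]
    by_cases h : pvCntE g + pvCntS (pvEast g) = 0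
    · rw [if_pos h, if_pos (hiff.mp h)]
    · rw [if_neg h, if_neg (fun hg => h (hiff.mpr hg))]
      have hlen2 : (pvSouth (pvEast g)).length = g.length := by
        rw [pvSouth_length, hlenE]
      rw [← hlen2]
      exact ih (step + 1) (pvSouth (pvEast g)) E' S' D'' hrectS
        ⟨hE'n, hS'n, hD''n, mem_east_south (pvEast g) W hrectE E' hE', hS2, hD2⟩

lemma inv_init (rows : List (List Char)) :
    pvInv rows (PySem.Set.ofList (pvPosList rows '>'))
      (PySem.Set.ofList (pvPosList rows 'v')) (PySem.Set.ofList (pvPosList rows '.')) := by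
  refine ⟨PySem.Set.nodup_ofList _, PySem.Set.nodup_ofList _, PySem.Set.nodup_ofList _,
    ?_, ?_, ?_⟩ <;>
    intro p <;> rw [PySem.Set.mem_ofList, mem_posList]

-- ===== VERDICT =====
theorem solve_spec : Claim_equal_solve := by
  intro input _ hpre
  unfold Spec_solve solve solve_alt
  simp only
  exact run_eq ((PySem.Chars.splitOn input.toList ['\n']).headI.length) 65535 1 _ _ _ _
    hpre (inv_init _)
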